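-- pv_equiv track=rewrite | github.com/ElliottSax/engineer | training_iterations/training_iteration81.py | longest_repeated_k_times
-- ===== SOURCE A (Python) =====
-- def suffix_array(s):
--     """Build suffix array O(n log^2 n)."""
--     n = len(s)
--     sa = list(range(n))
--     rank = [ord(c) for c in s]
--
--     k = 1
--     while k < n:
--         def key(i):
--             return (rank[i], rank[i + k] if i + k < n else -1)
--         sa.sort(key=key)
--         new_rank = [0] * n
--         for i in range(1, n):
--             new_rank[sa[i]] = new_rank[sa[i-1]] + (1 if key(sa[i]) != key(sa[i-1]) else 0)
--         rank = new_rank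
--         k *= 2
--     return sa
--
-- def kasai_lcp(s, sa):
--     """Kasai's algorithm for LCP array."""
--     n = len(s)
--     rank = [0] * n
--     for i in range(n):
--         rank[sa[i]] = i
--     lcp = [0] * n
--     k = 0
--     for i in range(n):
--         if rank[i] == 0:
--             k = 0
--             continue
--         j = sa[rank[i] - 1]
--         while i + k < n and j + k < n and s[i + k] == s[j + k]:
--             k += 1
--         lcp[rank[i]] = k
--         if k > 0:
--             k -= 1
--     return lcp
--
-- def longest_repeated_k_times(s, k):
--     """Find longest substring appearing at least k times."""
--     if not s or k <= 0:
--         return ""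
--     if k == 1:
--         return s
--     n = len(s)
--     sa = suffix_array(s)
--     lcp = kasai_lcp(s, sa)
--
--     from collections import deque
--     dq = deque()
--     max_len = 0
--     start = 0
--
--     for i in range(1, n):
--         while dq and lcp[dq[-1]] >= lcp[i]:
--             dq.pop()
--         dq.append(i)
--         if i >= k - 1:
--             while dq and dq[0] <= i - k + 1:
--                 dq.popleft()
--             if dq:
--                 min_lcp = lcp[dq[0]]
--                 if min_lcp > max_len:
--                     max_len = min_lcp
--                     start = sa[i]
--
--     return s[start:start + max_len] if max_len > 0 else ""
-- ===== SOURCE B (Python) =====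
-- def longest_repeated_k_times(s, k):
--     """Find longest substring appearing at least k times."""
--     if not s or k <= 0:
--         return ""
--     if k == 1:
--         return s
--     n = len(s)
--     suf = sorted(range(n), key=lambda i: s[i:])
--     best = ""
--     for j in range(n - k + 1):
--         a, b = suf[j], suf[j + k - 1]
--         l = 0
--         for x, y in zip(s[a:], s[b:]):
--             if x != y:
--                 break
--             l += 1
--         if l > len(best):
--             best = s[a:a + l]
--     return best
-- ===== Notes on version B (the rewrite author's own statement) =====
-- stated objective: simpler
-- what changed: Replaces the doubling suffix array + Kasai LCP array + monotonic-deque sliding minimum by a direct comparison sort of the suffixes and, for each block of k consecutive sorted suffixes, a direct character-by-character common prefix of the block's first and last suffix (which equals the window minimum of adjacent LCPs), keeping the best substring.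
import Mathlib
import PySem

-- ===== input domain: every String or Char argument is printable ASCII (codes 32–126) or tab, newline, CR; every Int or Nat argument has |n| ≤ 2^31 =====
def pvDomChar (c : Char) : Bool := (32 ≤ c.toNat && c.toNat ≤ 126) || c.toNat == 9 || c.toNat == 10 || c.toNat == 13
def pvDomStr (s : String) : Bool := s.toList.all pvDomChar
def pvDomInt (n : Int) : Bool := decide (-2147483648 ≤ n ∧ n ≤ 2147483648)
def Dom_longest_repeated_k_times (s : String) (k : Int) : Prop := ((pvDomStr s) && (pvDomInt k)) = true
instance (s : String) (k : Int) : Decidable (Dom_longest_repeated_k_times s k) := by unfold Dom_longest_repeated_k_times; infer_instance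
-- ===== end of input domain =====

-- B replaces the doubling suffix array + Kasai LCP + monotonic deque of A by a direct sort of the
-- suffixes and a direct first/last common-prefix scan per block of k sorted suffixes (objective:
-- simpler; same return value, proved below).

-- ===== PORT A =====

-- ord(c)
def pvOrd (c : Char) : Int := (c.toNat : Int)

-- the two components of the sort key `key(i) = (rank[i], rank[i + k] if i + k < n else -1)`
def pvKey1 (rank : List Int) (i : Int) : Int := PySem.List.pyGetD rank i 0
def pvKey2 (n : Nat) (rank : List Int) (w : Nat) (i : Int) : Int :=
  if i + (w : Int) < (n : Int) then PySem.List.pyGetD rank (i + (w : Int)) 0 else -1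

-- `new_rank[sa[i]] = new_rank[sa[i-1]] + (1 if key(sa[i]) != key(sa[i-1]) else 0)` for i in range(1, n)
def pvNewRank (n : Nat) (rank : List Int) (w : Nat) (sa : List Int) : List Int :=
  (PySem.List.pyRange 1 (n : Int) 1).foldl
    (fun nr i =>
      let a := PySem.List.pyGetD sa i 0
      let b := PySem.List.pyGetD sa (i - 1) 0
      PySem.List.pySetD nr a
        (PySem.List.pyGetD nr b 0 +
          if (pvKey1 rank a, pvKey2 n rank w a) ≠ (pvKey1 rank b, pvKey2 n rank w b) then 1 else 0))
    (PySem.List.pyRepeat [0] (n : Int))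

-- `while k < n:` loop of suffix_array (w is Python's k; the `0 < w` argument only justifies termination)
def pvSALoop (cs : List Char) (sa rank : List Int) (w : Nat) (hw : 0 < w) : List Int :=
  if h : w < cs.length then
    let sa' := PySem.List.sorted2 sa (pvKey1 rank) (pvKey2 cs.length rank w) false
    pvSALoop cs sa' (pvNewRank cs.length rank w sa') (2 * w) (by omega)
  else sa
termination_by cs.length - w
decreasing_by omega

def pvSuffixArray (cs : List Char) : List Int :=
  pvSALoop cs (PySem.List.pyRange 0 (cs.length : Int) 1) (cs.map pvOrd) 1 Nat.one_pos

-- `rank[sa[i]] = i` loop of kasai_lcp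
def pvRankOf (n : Nat) (sa : List Int) : List Int :=
  (PySem.List.pyRange 0 (n : Int) 1).foldl
    (fun r i => PySem.List.pySetD r (PySem.List.pyGetD sa i 0) i)
    (PySem.List.pyRepeat [0] (n : Int))

-- `while i + k < n and j + k < n and s[i + k] == s[j + k]: k += 1`
def pvExtend (cs : List Char) (i j h : Int) : Int :=
  if hc : i + h < (cs.length : Int) ∧ j + h < (cs.length : Int) ∧
      PySem.List.pyGetD cs (i + h) ' ' = PySem.List.pyGetD cs (j + h) ' ' then
    pvExtend cs i j (h + 1)
  else h
termination_by ((cs.length : Int) - i - h).toNat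
decreasing_by omega

def pvKasai (cs : List Char) (sa : List Int) : List Int :=
  let n := cs.length
  let rank := pvRankOf n sa
  ((PySem.List.pyRange 0 (n : Int) 1).foldl
    (fun (st : List Int × Int) i =>
      let ri := PySem.List.pyGetD rank i 0
      if ri = 0 then (st.1, 0)
      else
        let j := PySem.List.pyGetD sa (ri - 1) 0
        let h := pvExtend cs i j st.2
        (PySem.List.pySetD st.1 ri h, if 0 < h then h - 1 else h))
    (PySem.List.pyRepeat [0] (n : Int), 0)).1

-- `while dq and lcp[dq[-1]] >= lcp[i]: dq.pop()`
def pvPopBack (lcp : List Int) (v : Int) (dq : List Int) : List Int :=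
  if h : dq = [] then dq
  else if v ≤ PySem.List.pyGetD lcp (dq.getLast h) 0 then pvPopBack lcp v dq.dropLast
  else dq
termination_by dq.length
decreasing_by
  simp only [List.length_dropLast]
  have := List.length_pos_iff.mpr h
  omega

-- `while dq and dq[0] <= i - k + 1: dq.popleft()`
def pvPopFront (b : Int) : List Int → List Int
  | [] => []
  | t :: rest => if t ≤ b then pvPopFront b rest else t :: rest

-- body of `for i in range(1, n)` in longest_repeated_k_times; state (dq, max_len, start)
def pvStepA (k : Int) (sa lcp : List Int) (st : List Int × Int × Int) (i : Int) : List Int × Int × Int :=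
  let dq1 := pvPopBack lcp (PySem.List.pyGetD lcp i 0) st.1 ++ [i]
  if k - 1 ≤ i then
    let dq2 := pvPopFront (i - k + 1) dq1
    match dq2 with
    | [] => ([], st.2)
    | t :: rest =>
      if st.2.1 < PySem.List.pyGetD lcp t 0 then
        (t :: rest, PySem.List.pyGetD lcp t 0, PySem.List.pyGetD sa i 0)
      else (t :: rest, st.2)
  else (dq1, st.2)

def longest_repeated_k_times (s : String) (k : Int) : String :=
  if s.toList = [] ∨ k ≤ 0 then ""
  else if k = 1 then s
  else
    let cs := s.toList
    let n := cs.length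
    let sa := pvSuffixArray cs
    let lcp := pvKasai cs sa
    let r := (PySem.List.pyRange 1 (n : Int) 1).foldl (pvStepA k sa lcp) ([], 0, 0)
    if 0 < r.2.1 then String.ofList (PySem.List.slice cs (some r.2.2) (some (r.2.2 + r.2.1))) else ""

-- ===== PORT B =====

-- sort key `s[i:]`
def pvSufKey (cs : List Char) (i : Int) : List Char := PySem.List.slice cs (some i) none

-- `suf = sorted(range(n), key=lambda i: s[i:])`
def pvSufSort (cs : List Char) : List Int :=
  PySem.List.sorted (PySem.List.pyRange 0 (cs.length : Int) 1) (pvSufKey cs) false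

-- `for x, y in zip(s[a:], s[b:]): if x != y: break / l += 1`
def pvZipLen : Int → List Char → List Char → Int
  | l, x :: xs, y :: ys => if x ≠ y then l else pvZipLen (l + 1) xs ys
  | l, _, _ => l

-- body of `for j in range(n - k + 1)`
def pvStepB (cs : List Char) (k : Int) (suf : List Int) (best : List Char) (j : Int) : List Char :=
  let a := PySem.List.pyGetD suf j 0
  let b := PySem.List.pyGetD suf (j + k - 1) 0
  let l := pvZipLen 0 (PySem.List.slice cs (some a) none) (PySem.List.slice cs (some b) none)
  if (best.length : Int) < l then PySem.List.slice cs (some a) (some (a + l)) else best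

def longest_repeated_k_times_alt (s : String) (k : Int) : String :=
  if s.toList = [] ∨ k ≤ 0 then ""
  else if k = 1 then s
  else
    let cs := s.toList
    let n := cs.length
    let suf := pvSufSort cs
    let best := (PySem.List.pyRange 0 ((n : Int) - k + 1) 1).foldl (pvStepB cs k suf) []
    String.ofList best

-- ===== PRECONDITION & SPEC =====
def Spec_longest_repeated_k_times (s : String) (k : Int) (out : String) : Prop := out = longest_repeated_k_times_alt s k
instance (s : String) (k : Int) (out : String) : Decidable (Spec_longest_repeated_k_times s k out) := by unfold Spec_longest_repeated_k_times; infer_instance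

-- ===== CLAIM (what is proved, stated in full; the proofs are below) =====
def Claim_equal_longest_repeated_k_times : Prop := ∀ (s : String) (k : Int), Dom_longest_repeated_k_times s k → Spec_longest_repeated_k_times s k (longest_repeated_k_times s k)

-- ===== LEMMAS AND PROOFS =====

-- lcpLen: length of the longest common prefix of two lists
def lcpLen : List Char → List Char → Nat
  | a :: as, b :: bs => if a = b then lcpLen as bs + 1 else 0
  | _, _ => 0

-- suffix of cs starting at Int index i (i ≥ 0 in all uses)
def sfx (cs : List Char) (i : Int) : List Char := cs.drop i.toNat

theorem lcpLen_nil_left (b : List Char) : lcpLen [] b = 0 := by cases b <;> rfl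

theorem lcpLen_comm (a b : List Char) : lcpLen a b = lcpLen b a := by
  induction a generalizing b with
  | nil => cases b <;> rfl
  | cons x as ih =>
    cases b with
    | nil => rfl
    | cons y bs =>
      simp only [lcpLen]
      rcases eq_or_ne x y with h | h
      · simp [h, ih]
      · simp [h, Ne.symm h]

theorem lcpLen_cons_self (x : Char) (as bs : List Char) :
    lcpLen (x :: as) (x :: bs) = lcpLen as bs + 1 := by simp [lcpLen]

theorem le_lcpLen_iff (a b : List Char) (m : Nat) :
    m ≤ lcpLen a b ↔ m ≤ a.length ∧ m ≤ b.length ∧ a.take m = b.take m := by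
  induction a generalizing b m with
  | nil =>
    cases m with
    | zero => simp [lcpLen_nil_left]
    | succ m => simp [lcpLen_nil_left]
  | cons x as ih =>
    cases b with
    | nil => cases m <;> simp [lcpLen]
    | cons y bs =>
      cases m with
      | zero => simp
      | succ m =>
        simp only [List.length_cons, List.take_succ_cons]
        rcases eq_or_ne x y with h | h
        · subst h
          rw [lcpLen_cons_self]
          constructor
          · intro hm
            obtain ⟨h1, h2, h3⟩ := (ih bs m).1 (by omega)
            refine ⟨by omega, by omega, ?_⟩
            rw [h3]
          · rintro ⟨h1, h2, h3⟩
            have h4 : as.take m = bs.take m := by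
              simpa using h3
            have := (ih bs m).2 ⟨by omega, by omega, h4⟩
            omega
        · simp only [lcpLen, if_neg h]
          constructor
          · omega
          · rintro ⟨-, -, h3⟩
            have hxy : x = y ∧ as.take m = bs.take m := by simpa using h3
            exact absurd hxy.1 h

theorem lcpLen_le_left (a b : List Char) : lcpLen a b ≤ a.length :=
  ((le_lcpLen_iff a b (lcpLen a b)).1 le_rfl).1

theorem lcpLen_le_right (a b : List Char) : lcpLen a b ≤ b.length :=
  ((le_lcpLen_iff a b (lcpLen a b)).1 le_rfl).2.1

theorem take_lcpLen (a b : List Char) : a.take (lcpLen a b) = b.take (lcpLen a b) :=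
  ((le_lcpLen_iff a b (lcpLen a b)).1 le_rfl).2.2

theorem take_eq_take_of_le_lcpLen (a b : List Char) (m : Nat) (h : m ≤ lcpLen a b) :
    a.take m = b.take m := ((le_lcpLen_iff a b m).1 h).2.2

theorem lcpLen_succ_le_iff (a b : List Char) (m : Nat) (hm : m ≤ lcpLen a b) :
    m + 1 ≤ lcpLen a b ↔ m < a.length ∧ m < b.length ∧ a[m]? = b[m]? := by
  rw [le_lcpLen_iff]
  constructor
  · rintro ⟨h1, h2, h3⟩
    refine ⟨h1, h2, ?_⟩
    have := congrArg (fun l => l[m]?) h3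
    simpa [List.getElem?_take] using this
  · rintro ⟨h1, h2, h3⟩
    refine ⟨h1, h2, ?_⟩
    rw [List.take_succ, List.take_succ, take_eq_take_of_le_lcpLen a b m hm, h3]

-- the List Char order is lexicographic; facts about it
theorem list_lt_of_take_lt (a b : List Char) (m : Nat) (h : a.take m < b.take m) : a < b := by
  induction m generalizing a b with
  | zero => simp only [List.take_zero] at h; exact absurd h (List.not_lt_nil _)
  | succ m ih =>
    cases a with
    | nil => cases b with
      | nil => simp only [List.take_nil] at h; exact absurd h (List.not_lt_nil _)
      | cons y bs => exact List.nil_lt_cons _ _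
    | cons x as =>
      cases b with
      | nil => simp only [List.take_nil] at h; exact absurd h (List.not_lt_nil _)
      | cons y bs =>
        simp only [List.take_succ_cons, List.cons_lt_cons_iff] at h ⊢
        rcases h with h | ⟨h1, h2⟩
        · exact .inl h
        · exact .inr ⟨h1, ih _ _ h2⟩

-- appending after equal-length prefixes
theorem append_lt_append_iff (x y u v : List Char) (hlen : x.length = y.length) :
    x ++ u < y ++ v ↔ x < y ∨ (x = y ∧ u < v) := by
  induction x generalizing y with
  | nil =>
    cases y with
    | nil => simpa using fun h => (List.not_lt_nil ([] : List Char)) h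
    | cons y ys => simp at hlen
  | cons a xs ih =>
    cases y with
    | nil => simp at hlen
    | cons b ys =>
      simp only [List.length_cons, Nat.succ_inj] at hlen
      simp only [List.cons_append, List.cons_lt_cons_iff, List.cons.injEq, ih ys hlen]
      constructor
      · rintro (h | ⟨h1, h2 | ⟨h3, h4⟩⟩)
        · exact .inl (.inl h)
        · exact .inl (.inr ⟨h1, h2⟩)
        · exact .inr ⟨⟨h1, h3⟩, h4⟩
      · rintro ((h | ⟨h1, h2⟩) | ⟨⟨h1, h2⟩, h3⟩)
        · exact .inl h
        · exact .inr ⟨h1, .inl h2⟩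
        · exact .inr ⟨h1, .inr ⟨h2, h3⟩⟩

-- suffixes of cs are pairwise distinct
theorem sfx_ne (cs : List Char) (i j : Nat) (hi : i < cs.length) (hj : j < cs.length) (hne : i ≠ j) :
    cs.drop i ≠ cs.drop j := by
  intro h
  have := congrArg List.length h
  simp only [List.length_drop] at this
  omega

theorem lcpLen_drop_succ (cs : List Char) (i j : Nat) (hi : i < cs.length) (hj : j < cs.length)
    (hij : cs[i] = cs[j]) :
    lcpLen (cs.drop (i + 1)) (cs.drop (j + 1)) + 1 = lcpLen (cs.drop i) (cs.drop j) := by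
  rw [List.drop_eq_getElem_cons hi, List.drop_eq_getElem_cons hj]
  simp [lcpLen, hij]

theorem drop_lt_drop_succ (cs : List Char) (i j : Nat) (hi : i < cs.length) (hj : j < cs.length)
    (hij : cs[i] = cs[j]) (h : cs.drop i < cs.drop j) : cs.drop (i + 1) < cs.drop (j + 1) := by
  rw [List.drop_eq_getElem_cons hi, List.drop_eq_getElem_cons hj] at h
  rw [List.cons_lt_cons_iff] at h
  rcases h with h | ⟨_, h⟩
  · rw [hij] at h; exact absurd h (lt_irrefl _)
  · exact h

-- the two character-scanning while loops compute lcpLen of the two suffixes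
theorem pvExtend_eq (cs : List Char) (i j h : Int) (hi : 0 ≤ i) (hj : 0 ≤ j) (h0 : 0 ≤ h)
    (hle : h.toNat ≤ lcpLen (sfx cs i) (sfx cs j)) :
    pvExtend cs i j h = (lcpLen (sfx cs i) (sfx cs j) : Int) := by
  set L := lcpLen (sfx cs i) (sfx cs j) with hL
  have hcond : ∀ hh : Int, 0 ≤ hh →
      ((i + hh < (cs.length : Int) ∧ j + hh < (cs.length : Int) ∧
        PySem.List.pyGetD cs (i + hh) ' ' = PySem.List.pyGetD cs (j + hh) ' ') ↔
       (hh.toNat < (sfx cs i).length ∧ hh.toNat < (sfx cs j).length ∧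
        (sfx cs i)[hh.toNat]? = (sfx cs j)[hh.toNat]?)) := by
    intro hh hh0
    have hslen : (sfx cs i).length = cs.length - i.toNat := by simp [sfx]
    have htlen : (sfx cs j).length = cs.length - j.toNat := by simp [sfx]
    constructor
    · rintro ⟨h1, h2, h3⟩
      have hi' : (i + hh).toNat = i.toNat + hh.toNat := by omega
      have hj' : (j + hh).toNat = j.toNat + hh.toNat := by omega
      have hb1 : i.toNat + hh.toNat < cs.length := by omega
      have hb2 : j.toNat + hh.toNat < cs.length := by omega
      refine ⟨by omega, by omega, ?_⟩
      rw [PySem.List.pyGetD_eq_getElem cs ' ' (by omega) h1,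
          PySem.List.pyGetD_eq_getElem cs ' ' (by omega) h2] at h3
      have h4 : cs[(i + hh).toNat]? = cs[(j + hh).toNat]? := by
        rw [List.getElem?_eq_getElem (by omega), List.getElem?_eq_getElem (by omega)]
        exact congrArg some h3
      rw [hi', hj'] at h4
      simp only [sfx, List.getElem?_drop]
      exact h4
    · rintro ⟨h1, h2, h3⟩
      rw [hslen] at h1
      rw [htlen] at h2
      have hb1 : i.toNat + hh.toNat < cs.length := by omega
      have hb2 : j.toNat + hh.toNat < cs.length := by omega
      have g1 : i + hh < (cs.length : Int) := by omega
      have g2 : j + hh < (cs.length : Int) := by omega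
      refine ⟨g1, g2, ?_⟩
      rw [PySem.List.pyGetD_eq_getElem cs ' ' (by omega) g1,
          PySem.List.pyGetD_eq_getElem cs ' ' (by omega) g2]
      have hi' : (i + hh).toNat = i.toNat + hh.toNat := by omega
      have hj' : (j + hh).toNat = j.toNat + hh.toNat := by omega
      have h4 : cs[(i + hh).toNat]? = cs[(j + hh).toNat]? := by
        rw [hi', hj']
        simp only [sfx, List.getElem?_drop] at h3
        exact h3
      rw [List.getElem?_eq_getElem (by omega), List.getElem?_eq_getElem (by omega)] at h4
      exact Option.some.inj h4
  obtain ⟨d, hd⟩ : ∃ d, L - h.toNat = d := ⟨_, rfl⟩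
  induction d generalizing h with
  | zero =>
    have hEq : h.toNat = L := by omega
    rw [pvExtend, dif_neg]
    · omega
    · intro hc
      have := (hcond h h0).1 hc
      have : h.toNat + 1 ≤ L := (lcpLen_succ_le_iff _ _ _ hle).2 this
      omega
  | succ d ihd =>
    have hlt : h.toNat + 1 ≤ L := by omega
    rw [pvExtend, dif_pos]
    · exact ihd (h + 1) (by omega) (by omega) (by omega)
    · exact (hcond h h0).2 ((lcpLen_succ_le_iff _ _ _ hle).1 hlt)

theorem pvZipLen_add (xs : List Char) : ∀ (ys : List Char) (l : Int),
    pvZipLen l xs ys = l + (lcpLen xs ys : Int) := by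
  induction xs with
  | nil =>
    intro ys l
    cases ys <;> simp [pvZipLen, lcpLen_nil_left, lcpLen]
  | cons x xs ih =>
    intro ys l
    cases ys with
    | nil => simp [pvZipLen, lcpLen]
    | cons y ys =>
      by_cases h : x = y
      · subst h
        rw [show pvZipLen l (x :: xs) (x :: ys) = pvZipLen (l + 1) xs ys from by
              simp [pvZipLen]]
        rw [ih ys (l + 1), lcpLen_cons_self]
        push_cast
        ring
      · simp [pvZipLen, h, lcpLen]

theorem lcpLen_self (a : List Char) : lcpLen a a = a.length := by
  induction a with
  | nil => rfl
  | cons x as ih => rw [lcpLen_cons_self, ih]; rfl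

theorem lcpLen_chain (a b c : List Char) (hab : a < b ∨ a = b) (hbc : b < c ∨ b = c) :
    lcpLen a c = min (lcpLen a b) (lcpLen b c) := by
  rcases hab with hab | rfl
  · rcases hbc with hbc | rfl
    · induction a generalizing b c with
      | nil => simp [lcpLen_nil_left]
      | cons x as ih =>
        cases b with
        | nil => exact absurd hab (List.not_lt_nil _)
        | cons y bs =>
          cases c with
          | nil => exact absurd hbc (List.not_lt_nil _)
          | cons z cs' =>
            rw [List.cons_lt_cons_iff] at hab hbc
            rcases hab with hxy | ⟨rfl, hab⟩
            · have hxz : x < z := by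
                rcases hbc with hyz | ⟨rfl, _⟩
                · exact lt_trans hxy hyz
                · exact hxy
              simp only [lcpLen, if_neg (ne_of_lt hxy), if_neg (ne_of_lt hxz)]
              simp
            · rcases hbc with hyz | ⟨rfl, hbc⟩
              · simp only [lcpLen, if_neg (ne_of_lt hyz), if_pos rfl]
                simp
              · rw [lcpLen_cons_self, lcpLen_cons_self, lcpLen_cons_self,
                    ih bs cs' hab hbc, Nat.succ_min_succ]
    · rw [lcpLen_self]
      exact (min_eq_left (lcpLen_le_right a b)).symm
  · rw [lcpLen_self]
    exact (min_eq_right (lcpLen_le_left a c)).symm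

-- facts about B's sorted suffix list
theorem sufSort_eq_LO (cs : List Char) :
    pvSufSort cs = @PySem.List.sorted Int (List Char) LinearOrder.toPartialOrder.toLT
      LinearOrder.toDecidableLT (PySem.List.pyRange 0 (cs.length : Int) 1) (pvSufKey cs) false := by
  unfold pvSufSort
  congr

theorem SUF_perm (cs : List Char) : (pvSufSort cs).Perm (PySem.List.pyRange 0 (cs.length : Int) 1) :=
  PySem.List.sorted_perm _ _ _

theorem SUF_length (cs : List Char) : (pvSufSort cs).length = cs.length := by
  rw [(SUF_perm cs).length_eq, PySem.List.length_pyRange_one]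
  omega

theorem SUF_mem (cs : List Char) (i : Int) :
    i ∈ pvSufSort cs ↔ 0 ≤ i ∧ i < (cs.length : Int) := by
  rw [(SUF_perm cs).mem_iff, PySem.List.mem_pyRange_one]

theorem SUF_nodup (cs : List Char) : (pvSufSort cs).Nodup :=
  (SUF_perm cs).nodup_iff.2 (PySem.List.nodup_pyRange_one _ _)

theorem sufKey_eq_sfx (cs : List Char) (i : Int) (h : 0 ≤ i) : pvSufKey cs i = sfx cs i := by
  unfold pvSufKey sfx
  exact PySem.List.slice_from cs h

theorem SUF_pairwise_lt (cs : List Char) :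
    (pvSufSort cs).Pairwise (fun a b => sfx cs a < sfx cs b) := by
  have hle : (pvSufSort cs).Pairwise (fun a b => pvSufKey cs a ≤ pvSufKey cs b) := by
    rw [sufSort_eq_LO]
    exact PySem.List.sorted_pairwise _ _
  have hnd : (pvSufSort cs).Pairwise (fun a b : Int => a ≠ b) := SUF_nodup cs
  refine (hle.and hnd).imp_of_mem ?_
  intro a b ha hb ⟨h1, h2⟩
  have hA := (SUF_mem cs a).1 ha
  have hB := (SUF_mem cs b).1 hb
  rw [sufKey_eq_sfx cs a hA.1, sufKey_eq_sfx cs b hB.1] at h1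
  rcases lt_or_eq_of_le h1 with h | h
  · exact h
  · exfalso
    exact sfx_ne cs a.toNat b.toNat (by omega) (by omega) (by omega) h

theorem SUF_unique (cs : List Char) (ys : List Int)
    (hperm : ys.Perm (PySem.List.pyRange 0 (cs.length : Int) 1))
    (hpw : ys.Pairwise (fun a b => sfx cs a < sfx cs b)) : ys = pvSufSort cs := by
  rw [sufSort_eq_LO]
  refine (PySem.List.sorted_eq_of_perm_of_pairwise_lt _ ys (pvSufKey cs) hperm ?_).symm
  refine hpw.imp_of_mem ?_
  intro a b ha hb h
  have hA := PySem.List.mem_pyRange_one.1 (hperm.subset ha)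
  have hB := PySem.List.mem_pyRange_one.1 (hperm.subset hb)
  rw [sufKey_eq_sfx cs a hA.1, sufKey_eq_sfx cs b hB.1]
  exact h

-- element access on the sorted suffix list
def saN (cs : List Char) (r : Nat) : Int := (pvSufSort cs).getD r 0

theorem saN_bounds (cs : List Char) (r : Nat) (hr : r < cs.length) :
    0 ≤ saN cs r ∧ saN cs r < (cs.length : Int) := by
  have hlen : r < (pvSufSort cs).length := by rw [SUF_length]; exact hr
  have : saN cs r ∈ pvSufSort cs := by
    rw [saN, List.getD_eq_getElem _ _ hlen]
    exact List.getElem_mem hlen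
  exact (SUF_mem cs _).1 this

theorem sfxr_lt (cs : List Char) (r r' : Nat) (h : r < r') (hr' : r' < cs.length) :
    sfx cs (saN cs r) < sfx cs (saN cs r') := by
  have h1 : r < (pvSufSort cs).length := by rw [SUF_length]; omega
  have h2 : r' < (pvSufSort cs).length := by rw [SUF_length]; exact hr'
  have := List.pairwise_iff_getElem.1 (SUF_pairwise_lt cs) r r' h1 h2 h
  rwa [saN, saN, List.getD_eq_getElem _ _ h1, List.getD_eq_getElem _ _ h2]

theorem saN_inj (cs : List Char) (r r' : Nat) (hr : r < cs.length) (hr' : r' < cs.length)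
    (h : saN cs r = saN cs r') : r = r' := by
  rcases Nat.lt_trichotomy r r' with hlt | he | hgt
  · have := sfxr_lt cs r r' hlt hr'
    rw [h] at this
    exact absurd this (lt_irrefl _)
  · exact he
  · have := sfxr_lt cs r' r hgt hr
    rw [h] at this
    exact absurd this (lt_irrefl _)

-- the common prefix length of two suffixes in sorted position p < q, as a min over adjacent pairs,
-- stated as: it is ≤ every adjacent lcp in (p, q] and attained at some adjacent position
theorem block_lcp (cs : List Char) (p q : Nat) (hpq : p < q) (hq : q < cs.length) :
    (∃ t, p < t ∧ t ≤ q ∧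
        lcpLen (sfx cs (saN cs p)) (sfx cs (saN cs q)) =
        lcpLen (sfx cs (saN cs (t - 1))) (sfx cs (saN cs t))) ∧
    (∀ t, p < t → t ≤ q →
        lcpLen (sfx cs (saN cs p)) (sfx cs (saN cs q)) ≤
        lcpLen (sfx cs (saN cs (t - 1))) (sfx cs (saN cs t))) := by
  induction q with
  | zero => omega
  | succ q ih =>
    rcases Nat.eq_or_lt_of_le (Nat.succ_le_of_lt hpq) with he | hlt
    · constructor
      · exact ⟨q + 1, by omega, le_rfl, by rw [← he]; simp⟩
      · intro t h1 h2
        have : t = q + 1 := by omega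
        subst this
        rw [← he]
        simp
    · have hq' : q < cs.length := by omega
      have hpq' : p < q := by omega
      obtain ⟨⟨t0, ht1, ht2, ht3⟩, hall⟩ := ih hpq' hq'
      have hchain : lcpLen (sfx cs (saN cs p)) (sfx cs (saN cs (q + 1))) =
          min (lcpLen (sfx cs (saN cs p)) (sfx cs (saN cs q)))
              (lcpLen (sfx cs (saN cs q)) (sfx cs (saN cs (q + 1)))) :=
        lcpLen_chain _ _ _ (.inl (sfxr_lt cs p q hpq' hq')) (.inl (sfxr_lt cs q (q + 1) (by omega) hq))
      constructor
      · rcases le_total (lcpLen (sfx cs (saN cs p)) (sfx cs (saN cs q)))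
            (lcpLen (sfx cs (saN cs q)) (sfx cs (saN cs (q + 1)))) with h | h
        · exact ⟨t0, ht1, by omega, by rw [hchain, min_eq_left h, ht3]⟩
        · exact ⟨q + 1, by omega, le_rfl, by rw [hchain, min_eq_right h]; simp⟩
      · intro t h1 h2
        rcases Nat.eq_or_lt_of_le h2 with he2 | hlt2
        · subst he2
          rw [hchain]
          simp [min_le_right]
        · rw [hchain]
          exact le_trans (min_le_left _ _) (hall t h1 (by omega))


-- ===== correctness of A's doubling suffix-array construction =====

-- the prefix of length w of the suffix starting at i
def keyw (cs : List Char) (w i : Nat) : List Char := (cs.drop i).take w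

-- rank is an order-embedding of the length-w suffix prefixes
def RANKOK (cs : List Char) (rank : List Int) (w : Nat) : Prop :=
  rank.length = cs.length ∧
  (∀ i : Nat, i < cs.length → 0 ≤ rank.getD i 0) ∧
  (∀ i j : Nat, i < cs.length → j < cs.length →
      (rank.getD i 0 < rank.getD j 0 ↔ keyw cs w i < keyw cs w j))

theorem tri_iff {α β : Type} [LinearOrder α] [LinearOrder β] (a b : α) (u v : β)
    (h1 : a < b → u < v) (h2 : b < a → v < u) (h3 : a = b → u = v) :
    (a < b ↔ u < v) ∧ (a = b ↔ u = v) := by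
  constructor
  · constructor
    · exact h1
    · intro h
      rcases lt_trichotomy a b with hx | hx | hx
      · exact hx
      · have := h3 hx
        rw [this] at h
        exact absurd h (lt_irrefl _)
      · exact absurd (lt_trans h (h2 hx)) (lt_irrefl _)
  · constructor
    · exact h3
    · intro h
      rcases lt_trichotomy a b with hx | hx | hx
      · have := h1 hx
        rw [h] at this
        exact absurd this (lt_irrefl _)
      · exact hx
      · have := h2 hx
        rw [h] at this
        exact absurd this (lt_irrefl _)

theorem tri_iff_eq {α β : Type} [LinearOrder α] [LinearOrder β] (a b : α) (u v : β)
    (h1 : a < b ↔ u < v) (h2 : b < a ↔ v < u) : (a = b ↔ u = v) := by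
  constructor
  · intro h
    rcases lt_trichotomy u v with hx | hx | hx
    · have := h1.2 hx
      rw [h] at this
      exact absurd this (lt_irrefl _)
    · exact hx
    · have := h2.2 hx
      rw [h] at this
      exact absurd this (lt_irrefl _)
  · intro h
    rcases lt_trichotomy a b with hx | hx | hx
    · have := h1.1 hx
      rw [h] at this
      exact absurd this (lt_irrefl _)
    · exact hx
    · have := h2.1 hx
      rw [h] at this
      exact absurd this (lt_irrefl _)

theorem tri_third {α β : Type} [LinearOrder α] [LinearOrder β] (a b : α) (u v : β)
    (h1 : a = b ↔ u = v) (h2 : b < a ↔ v < u) : a < b ↔ u < v := by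
  constructor
  · intro h
    rcases lt_trichotomy u v with hx | hx | hx
    · exact hx
    · have := h1.2 hx
      rw [this] at h
      exact absurd h (lt_irrefl _)
    · have := h2.2 hx
      exact absurd (lt_trans h this) (lt_irrefl _)
  · intro h
    rcases lt_trichotomy a b with hx | hx | hx
    · exact hx
    · have := h1.1 hx
      rw [this] at h
      exact absurd h (lt_irrefl _)
    · have := h2.1 hx
      exact absurd (lt_trans h this) (lt_irrefl _)

theorem RANKOK_eq_iff (cs : List Char) (rank : List Int) (w : Nat) (hr : RANKOK cs rank w)
    (i j : Nat) (hi : i < cs.length) (hj : j < cs.length) :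
    (rank.getD i 0 = rank.getD j 0) ↔ keyw cs w i = keyw cs w j :=
  tri_iff_eq _ _ _ _ (hr.2.2 i j hi hj) (hr.2.2 j i hj hi)

theorem keyw_length (cs : List Char) (w i : Nat) :
    (keyw cs w i).length = min w (cs.length - i) := by simp [keyw]

theorem keyw_add (cs : List Char) (w w' i : Nat) :
    keyw cs (w + w') i = keyw cs w i ++ keyw cs w' (i + w) := by
  unfold keyw
  rw [List.take_add, List.drop_drop]

theorem keyw_nil (cs : List Char) (w i : Nat) (h : cs.length ≤ i) : keyw cs w i = [] := by
  unfold keyw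
  rw [List.drop_eq_nil_of_le h, List.take_nil]

theorem keyw_ne_nil (cs : List Char) (w i : Nat) (hw : 0 < w) (hi : i < cs.length) :
    keyw cs w i ≠ [] := by
  intro h
  have h2 : min w (cs.length - i) = 0 := by rw [← keyw_length cs w i, h]; rfl
  omega

theorem keyw_full (cs : List Char) (w i : Nat) (h : cs.length ≤ i + w) :
    keyw cs w i = cs.drop i := by
  unfold keyw
  exact List.take_of_length_le (by rw [List.length_drop]; omega)

-- the doubled pair key of A, as a lexicographic pair
def pKi (cs : List Char) (rank : List Int) (w : Nat) (x : Int) : Int ×ₗ Int :=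
  toLex (pvKey1 rank x, pvKey2 cs.length rank w x)

theorem pKi_fst (cs : List Char) (rank : List Int) (w i : Nat) :
    (ofLex (pKi cs rank w (i : Int))).1 = rank.getD i 0 := by
  simp [pKi, pvKey1]

theorem pKi_snd (cs : List Char) (rank : List Int) (w i : Nat) :
    (ofLex (pKi cs rank w (i : Int))).2 =
      if i + w < cs.length then rank.getD (i + w) 0 else -1 := by
  unfold pKi pvKey2
  rw [show (i : Int) + (w : Int) = ((i + w : Nat) : Int) by push_cast; ring]
  simp only [ofLex_toLex, PySem.List.pyGetD_natCast]
  by_cases h : i + w < cs.length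
  · rw [if_pos (by exact_mod_cast h), if_pos h]
  · rw [if_neg (by exact_mod_cast h), if_neg h]

theorem keyw_eq_len (cs : List Char) (w i j : Nat) (hw : 0 < w) (hi : i < cs.length)
    (hj : j < cs.length) (hij : i ≠ j) (h : keyw cs w i = keyw cs w j) :
    i + w ≤ cs.length ∧ j + w ≤ cs.length := by
  have := congrArg List.length h
  rw [keyw_length, keyw_length] at this
  omega

theorem pKi_lt_fwd (cs : List Char) (rank : List Int) (w : Nat) (hw : 0 < w)
    (hr : RANKOK cs rank w) (i j : Nat) (hi : i < cs.length) (hj : j < cs.length)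
    (h : pKi cs rank w (i : Int) < pKi cs rank w (j : Int)) :
    keyw cs (w + w) i < keyw cs (w + w) j := by
  rw [Prod.Lex.lt_iff] at h
  rw [pKi_fst, pKi_fst, pKi_snd, pKi_snd] at h
  obtain ⟨hlen, hnneg, hlt⟩ := hr
  rcases h with h1 | ⟨h1, h2⟩
  · have hk : keyw cs w i < keyw cs w j := (hlt i j hi hj).1 h1
    apply list_lt_of_take_lt _ _ w
    have e1 : (keyw cs (w + w) i).take w = keyw cs w i := by
      unfold keyw
      rw [List.take_take]
      congr 1
      omega
    have e2 : (keyw cs (w + w) j).take w = keyw cs w j := by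
      unfold keyw
      rw [List.take_take]
      congr 1
      omega
    rw [e1, e2]
    exact hk
  · have hk1 : keyw cs w i = keyw cs w j := (RANKOK_eq_iff cs rank w ⟨hlen, hnneg, hlt⟩ i j hi hj).1 h1
    by_cases hij : i = j
    · subst hij
      exact absurd h2 (lt_irrefl _)
    · obtain ⟨hiw, hjw⟩ := keyw_eq_len cs w i j hw hi hj hij hk1
      rw [keyw_add, keyw_add]
      rw [append_lt_append_iff _ _ _ _ (by rw [hk1])]
      refine .inr ⟨hk1, ?_⟩
      by_cases h3 : i + w < cs.length
      · by_cases h4 : j + w < cs.length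
        · rw [if_pos h3, if_pos h4] at h2
          exact (hlt (i + w) (j + w) h3 h4).1 h2
        · rw [if_pos h3, if_neg h4] at h2
          have := hnneg (i + w) h3
          omega
      · by_cases h4 : j + w < cs.length
        · rw [keyw_nil cs w (i + w) (by omega)]
          have hne := keyw_ne_nil cs w (j + w) hw h4
          cases hkw : keyw cs w (j + w) with
          | nil => exact absurd hkw hne
          | cons z zs => exact List.nil_lt_cons _ _
        · exact absurd (by omega : i = j) hij

theorem pKi_eq_fwd (cs : List Char) (rank : List Int) (w : Nat) (hw : 0 < w)
    (hr : RANKOK cs rank w) (i j : Nat) (hi : i < cs.length) (hj : j < cs.length)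
    (h : pKi cs rank w (i : Int) = pKi cs rank w (j : Int)) :
    keyw cs (w + w) i = keyw cs (w + w) j := by
  have h1 : (ofLex (pKi cs rank w (i : Int))).1 = (ofLex (pKi cs rank w (j : Int))).1 := by rw [h]
  have h2 : (ofLex (pKi cs rank w (i : Int))).2 = (ofLex (pKi cs rank w (j : Int))).2 := by rw [h]
  rw [pKi_fst, pKi_fst] at h1
  rw [pKi_snd, pKi_snd] at h2
  obtain ⟨hlen, hnneg, hlt⟩ := hr
  have hk1 : keyw cs w i = keyw cs w j := (RANKOK_eq_iff cs rank w ⟨hlen, hnneg, hlt⟩ i j hi hj).1 h1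
  by_cases hij : i = j
  · subst hij; rfl
  · obtain ⟨hiw, hjw⟩ := keyw_eq_len cs w i j hw hi hj hij hk1
    rw [keyw_add, keyw_add, hk1]
    congr 1
    by_cases h3 : i + w < cs.length
    · by_cases h4 : j + w < cs.length
      · rw [if_pos h3, if_pos h4] at h2
        exact (RANKOK_eq_iff cs rank w ⟨hlen, hnneg, hlt⟩ (i + w) (j + w) h3 h4).1 h2
      · rw [if_pos h3, if_neg h4] at h2
        have := hnneg (i + w) h3
        omega
    · by_cases h4 : j + w < cs.length
      · rw [if_neg h3, if_pos h4] at h2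
        have := hnneg (j + w) h4
        omega
      · rw [keyw_nil cs w (i + w) (by omega), keyw_nil cs w (j + w) (by omega)]

theorem pKi_iff (cs : List Char) (rank : List Int) (w : Nat) (hw : 0 < w)
    (hr : RANKOK cs rank w) (i j : Nat) (hi : i < cs.length) (hj : j < cs.length) :
    ((pKi cs rank w (i : Int) < pKi cs rank w (j : Int)) ↔ keyw cs (w + w) i < keyw cs (w + w) j) ∧
    ((pKi cs rank w (i : Int) = pKi cs rank w (j : Int)) ↔ keyw cs (w + w) i = keyw cs (w + w) j) :=
  tri_iff _ _ _ _ (pKi_lt_fwd cs rank w hw hr i j hi hj) (pKi_lt_fwd cs rank w hw hr j i hj hi)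
    (pKi_eq_fwd cs rank w hw hr i j hi hj)

-- Python's stable tuple-key sort is the sort by the corresponding lexicographic key
theorem sorted2_eq_sortedLex (xs : List Int) (k1 k2 : Int → Int) :
    PySem.List.sorted2 xs k1 k2 false =
      @PySem.List.sorted Int (Int ×ₗ Int) LinearOrder.toPartialOrder.toLT LinearOrder.toDecidableLT
        xs (fun x => toLex (k1 x, k2 x)) false := by
  show List.foldl _ [] xs = List.foldl _ [] xs
  congr 1
  funext acc a
  congr 1
  funext b
  simp only [Bool.false_eq_true, if_false]
  funext c
  rw [Bool.eq_iff_iff]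
  simp only [Bool.or_eq_true, Bool.and_eq_true, decide_eq_true_eq, Bool.not_eq_true',
    decide_eq_false_iff_not, Prod.Lex.lt_iff, ofLex_toLex]
  constructor
  · rintro (h | ⟨h1, h2⟩)
    · exact .inl h
    · rcases lt_trichotomy (k1 b) (k1 c) with h3 | h3 | h3
      · exact .inl h3
      · exact .inr ⟨h3, h2⟩
      · exact absurd h3 h1
  · rintro (h | ⟨h1, h2⟩)
    · exact .inl h
    · exact .inr ⟨by rw [h1]; exact lt_irrefl _, h2⟩

-- the dense re-ranking counter along the sorted list
def pvCnt (keyf : Int → Int × Int) (sa : List Int) : Nat → Int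
  | 0 => 0
  | t + 1 => pvCnt keyf sa t + (if keyf (sa.getD (t + 1) 0) ≠ keyf (sa.getD t 0) then 1 else 0)

theorem pvCnt_succ (keyf : Int → Int × Int) (sa : List Int) (t : Nat) :
    pvCnt keyf sa (t + 1) =
      pvCnt keyf sa t + (if keyf (sa.getD (t + 1) 0) ≠ keyf (sa.getD t 0) then 1 else 0) := rfl

theorem pvCnt_nonneg (keyf : Int → Int × Int) (sa : List Int) (t : Nat) :
    0 ≤ pvCnt keyf sa t := by
  induction t with
  | zero => exact le_refl 0
  | succ t ih =>
    rw [pvCnt_succ]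
    split <;> omega

theorem pvCnt_mono (keyf : Int → Int × Int) (sa : List Int) (t u : Nat) (h : t ≤ u) :
    pvCnt keyf sa t ≤ pvCnt keyf sa u := by
  induction u with
  | zero =>
    have ht0 : t = 0 := by omega
    subst ht0
    exact le_rfl
  | succ u ih =>
    rcases Nat.eq_or_lt_of_le h with he | hlt
    · rw [he]
    · have h1 := ih (by omega)
      have h2 : pvCnt keyf sa u ≤ pvCnt keyf sa (u + 1) := by
        rw [pvCnt_succ]
        split <;> omega
      omega

-- bounds of entries of a permutation of range(n)
theorem perm_range_bounds (n : Nat) (xs : List Int)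
    (hperm : xs.Perm (PySem.List.pyRange 0 (n : Int) 1)) (t : Nat) (ht : t < xs.length) :
    0 ≤ xs.getD t 0 ∧ xs.getD t 0 < (n : Int) := by
  have hm : xs.getD t 0 ∈ xs := by
    rw [List.getD_eq_getElem _ _ ht]
    exact List.getElem_mem ht
  have := PySem.List.mem_pyRange_one.1 (hperm.subset hm)
  omega

theorem perm_range_length (n : Nat) (xs : List Int)
    (hperm : xs.Perm (PySem.List.pyRange 0 (n : Int) 1)) : xs.length = n := by
  rw [hperm.length_eq, PySem.List.length_pyRange_one]
  omega

theorem perm_range_nodup (n : Nat) (xs : List Int)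
    (hperm : xs.Perm (PySem.List.pyRange 0 (n : Int) 1)) : xs.Nodup :=
  hperm.nodup_iff.2 (PySem.List.nodup_pyRange_one _ _)

theorem perm_range_getD_ne (n : Nat) (xs : List Int)
    (hperm : xs.Perm (PySem.List.pyRange 0 (n : Int) 1)) (t u : Nat) (ht : t < xs.length)
    (hu : u < xs.length) (hne2 : t ≠ u) : xs.getD t 0 ≠ xs.getD u 0 := by
  rw [List.getD_eq_getElem _ _ ht, List.getD_eq_getElem _ _ hu]
  intro h
  exact hne2 (((perm_range_nodup n xs hperm).getElem_inj_iff).1 h)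

theorem getD_replicate_zero (n p : Nat) : (List.replicate n (0 : Int)).getD p 0 = 0 := by
  by_cases h : p < n
  · exact List.getD_replicate _ (by simpa using h)
  · rw [List.getD_eq_default]
    simp
    omega

theorem newRank_spec (cs : List Char) (rank : List Int) (w : Nat) (sa : List Int)
    (hperm : sa.Perm (PySem.List.pyRange 0 (cs.length : Int) 1)) :
    (pvNewRank cs.length rank w sa).length = cs.length ∧
    (∀ t : Nat, t < cs.length →
      (pvNewRank cs.length rank w sa).getD (sa.getD t 0).toNat 0 =
      pvCnt (fun x => (pvKey1 rank x, pvKey2 cs.length rank w x)) sa t) := by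
  have hsalen : sa.length = cs.length := perm_range_length _ _ hperm
  set n := cs.length with hn
  set keyf := fun x => (pvKey1 rank x, pvKey2 cs.length rank w x) with hkeyf
  set step := fun (nr : List Int) (i : Int) =>
      PySem.List.pySetD nr (PySem.List.pyGetD sa i 0)
        (PySem.List.pyGetD nr (PySem.List.pyGetD sa (i - 1) 0) 0 +
          if (pvKey1 rank (PySem.List.pyGetD sa i 0), pvKey2 n rank w (PySem.List.pyGetD sa i 0)) ≠
             (pvKey1 rank (PySem.List.pyGetD sa (i - 1) 0), pvKey2 n rank w (PySem.List.pyGetD sa (i - 1) 0))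
          then 1 else 0) with hstep
  have hrepeat : PySem.List.pyRepeat [(0 : Int)] (n : Int) = List.replicate n 0 := by
    rw [PySem.List.pyRepeat_singleton]
    simp
  have main : ∀ m : Nat, 1 ≤ m → m ≤ n →
      ((PySem.List.pyRange 1 (m : Int) 1).foldl step (List.replicate n 0)).length = n ∧
      (∀ t : Nat, t < m →
        ((PySem.List.pyRange 1 (m : Int) 1).foldl step (List.replicate n 0)).getD
            (sa.getD t 0).toNat 0 = pvCnt keyf sa t) := by
    intro m
    induction m with
    | zero => omega
    | succ m ih =>
      intro _ hm
      by_cases hm1 : m = 0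
      · subst hm1
        rw [show ((1 : Nat) : Int) = 1 by norm_num, PySem.List.pyRange_one_eq_nil le_rfl]
        refine ⟨by simp, ?_⟩
        intro t ht
        have : t = 0 := by omega
        subst this
        simp only [List.foldl_nil]
        rw [getD_replicate_zero]
        rfl
      · have hm' : 1 ≤ m := by omega
        obtain ⟨ihlen, ihval⟩ := ih hm' (by omega)
        have hsplit : PySem.List.pyRange 1 ((m + 1 : Nat) : Int) 1 =
            PySem.List.pyRange 1 (m : Int) 1 ++ [(m : Int)] := by
          rw [show ((m + 1 : Nat) : Int) = (m : Int) + 1 by push_cast; ring]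
          exact PySem.List.pyRange_one_succ_right (by exact_mod_cast hm')
        rw [hsplit, List.foldl_append]
        set F := (PySem.List.pyRange 1 (m : Int) 1).foldl step (List.replicate n 0) with hF
        have hb : 0 ≤ sa.getD (m - 1) 0 ∧ sa.getD (m - 1) 0 < (n : Int) :=
          perm_range_bounds n sa hperm (m - 1) (by omega)
        have ha : 0 ≤ sa.getD m 0 ∧ sa.getD m 0 < (n : Int) :=
          perm_range_bounds n sa hperm m (by omega)
        have hstepm : List.foldl step F [(m : Int)] =
            F.set (sa.getD m 0).toNat (pvCnt keyf sa m) := by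
          simp only [List.foldl_cons, List.foldl_nil, hstep]
          rw [show (m : Int) - 1 = ((m - 1 : Nat) : Int) by omega]
          rw [PySem.List.pyGetD_natCast, PySem.List.pyGetD_natCast]
          rw [PySem.List.pySetD_of_nonneg _ _ ha.1]
          congr 1
          rw [PySem.List.pyGetD_eq_getElem F 0 hb.1 (by rw [ihlen]; exact hb.2)]
          rw [← List.getD_eq_getElem F 0 (by rw [ihlen]; omega)]
          rw [ihval (m - 1) (by omega)]
          conv_rhs => rw [show m = (m - 1) + 1 by omega]
          rw [pvCnt_succ]
          rw [show (m - 1) + 1 = m by omega]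
        rw [hstepm]
        constructor
        · rw [List.length_set, ihlen]
        · intro t ht
          by_cases hteq : t = m
          · subst hteq
            rw [List.getD_eq_getElem _ _ (by rw [List.length_set, ihlen]; omega)]
            rw [List.getElem_set_self]
          · have htm : t < m := by omega
            have hne : (sa.getD t 0).toNat ≠ (sa.getD m 0).toNat := by
              have h1 := perm_range_bounds n sa hperm t (by omega)
              have := perm_range_getD_ne n sa hperm t m (by omega) (by omega) hteq
              omega
            have hbt := perm_range_bounds n sa hperm t (by omega)
            rw [List.getD_eq_getElem _ _ (by rw [List.length_set, ihlen]; omega)]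
            rw [List.getElem_set_ne (Ne.symm hne)]
            rw [← List.getD_eq_getElem F 0 (by rw [ihlen]; omega)]
            exact ihval t htm
  by_cases hn0 : n = 0
  · unfold pvNewRank
    rw [hrepeat]
    rw [hn0]
    simp [PySem.List.pyRange_one_eq_nil]
  · have := main n (by omega) le_rfl
    unfold pvNewRank
    rw [hrepeat]
    exact this


-- the dense counter orders positions exactly like the pair keys
theorem cnt_key (cs : List Char) (rank : List Int) (w : Nat) (sa : List Int)
    (hsort : sa.Pairwise (fun a b => pKi cs rank w a ≤ pKi cs rank w b))
    (t u : Nat) (htu : t ≤ u) (hu : u < sa.length) :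
    (pvCnt (fun x => (pvKey1 rank x, pvKey2 cs.length rank w x)) sa t =
       pvCnt (fun x => (pvKey1 rank x, pvKey2 cs.length rank w x)) sa u ↔
     pKi cs rank w (sa.getD t 0) = pKi cs rank w (sa.getD u 0)) ∧
    (pvCnt (fun x => (pvKey1 rank x, pvKey2 cs.length rank w x)) sa t <
       pvCnt (fun x => (pvKey1 rank x, pvKey2 cs.length rank w x)) sa u ↔
     pKi cs rank w (sa.getD t 0) < pKi cs rank w (sa.getD u 0)) := by
  set keyf := fun x => (pvKey1 rank x, pvKey2 cs.length rank w x) with hkeyf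
  have hpk : ∀ x : Int, pKi cs rank w x = toLex (keyf x) := fun x => rfl
  have hadj : ∀ v : Nat, v + 1 < sa.length →
      pKi cs rank w (sa.getD v 0) ≤ pKi cs rank w (sa.getD (v + 1) 0) := by
    intro v hv
    have h1 := List.pairwise_iff_getElem.1 hsort v (v + 1) (by omega) hv (by omega)
    rwa [← List.getD_eq_getElem sa 0 (by omega), ← List.getD_eq_getElem sa 0 hv] at h1
  induction u with
  | zero =>
    have ht0 : t = 0 := by omega
    subst ht0
    simp
  | succ u ih =>
    rcases Nat.eq_or_lt_of_le htu with he | hlt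
    · rw [he]
      simp
    · have htu' : t ≤ u := by omega
      obtain ⟨ihe, ihl⟩ := ih htu' (by omega)
      have hle : pKi cs rank w (sa.getD u 0) ≤ pKi cs rank w (sa.getD (u + 1) 0) :=
        hadj u hu
      have httu : pKi cs rank w (sa.getD t 0) ≤ pKi cs rank w (sa.getD u 0) := by
        rcases Nat.eq_or_lt_of_le htu' with he2 | hlt2
        · rw [he2]
        · have h1 := List.pairwise_iff_getElem.1 hsort t u (by omega) (by omega) hlt2
          rwa [← List.getD_eq_getElem sa 0 (by omega), ← List.getD_eq_getElem sa 0 (by omega)] at h1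
      rw [pvCnt_succ]
      by_cases hch : keyf (sa.getD (u + 1) 0) ≠ keyf (sa.getD u 0)
      · rw [if_pos hch]
        have hkey : pKi cs rank w (sa.getD u 0) < pKi cs rank w (sa.getD (u + 1) 0) := by
          rcases lt_or_eq_of_le hle with h | h
          · exact h
          · exfalso
            apply hch
            have h2 : toLex (keyf (sa.getD u 0)) = toLex (keyf (sa.getD (u + 1) 0)) := h
            exact (toLex_inj.1 h2).symm
        have hcc : pvCnt keyf sa t ≤ pvCnt keyf sa u := pvCnt_mono keyf sa t u htu'
        constructor
        · constructor
          · intro h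
            omega
          · intro h
            exact absurd (lt_of_le_of_lt httu hkey) (by rw [h]; exact lt_irrefl _)
        · constructor
          · intro _
            exact lt_of_le_of_lt httu hkey
          · intro _
            omega
      · rw [if_neg hch]
        have he2 : pKi cs rank w (sa.getD (u + 1) 0) = pKi cs rank w (sa.getD u 0) := by
          rw [hpk, hpk]
          exact congrArg toLex (not_ne_iff.1 hch)
        rw [he2]
        simp only [add_zero]
        exact ⟨ihe, ihl⟩

theorem newRank_ok (cs : List Char) (rank : List Int) (w : Nat) (hw : 0 < w)
    (hr : RANKOK cs rank w) (sa : List Int)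
    (hperm : sa.Perm (PySem.List.pyRange 0 (cs.length : Int) 1))
    (hsort : sa.Pairwise (fun a b => pKi cs rank w a ≤ pKi cs rank w b)) :
    RANKOK cs (pvNewRank cs.length rank w sa) (w + w) := by
  obtain ⟨hlen, hval⟩ := newRank_spec cs rank w sa hperm
  have hsalen : sa.length = cs.length := perm_range_length _ _ hperm
  -- every index i < n sits at a unique position in sa
  have hpos : ∀ i : Nat, i < cs.length → ∃ t : Nat, t < cs.length ∧ sa.getD t 0 = (i : Int) := by
    intro i hi
    have hm : (i : Int) ∈ sa := hperm.mem_iff.2 (PySem.List.mem_pyRange_one.2 ⟨by omega, by omega⟩)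
    obtain ⟨t, ht, he⟩ := List.mem_iff_getElem.1 hm
    exact ⟨t, by omega, by rw [List.getD_eq_getElem sa 0 ht]; exact he⟩
  refine ⟨hlen, ?_, ?_⟩
  · intro i hi
    obtain ⟨t, ht, he⟩ := hpos i hi
    have := hval t ht
    rw [he] at this
    simp only [Int.toNat_natCast] at this
    rw [this]
    exact pvCnt_nonneg _ _ _
  · intro i j hi hj
    obtain ⟨t, ht, het⟩ := hpos i hi
    obtain ⟨u, hu, heu⟩ := hpos j hj
    have hvi := hval t ht
    have hvj := hval u hu
    rw [het] at hvi
    rw [heu] at hvj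
    simp only [Int.toNat_natCast] at hvi hvj
    rw [hvi, hvj]
    have hKi : pKi cs rank w (sa.getD t 0) = pKi cs rank w ((i : Nat) : Int) := by rw [het]
    have hKj : pKi cs rank w (sa.getD u 0) = pKi cs rank w ((j : Nat) : Int) := by rw [heu]
    have hPK := pKi_iff cs rank w hw hr i j hi hj
    rcases Nat.le_total t u with htu | hut
    · have hck := cnt_key cs rank w sa hsort t u htu (by omega)
      rw [hKi, hKj] at hck
      rw [hck.2]
      exact hPK.1
    · have hck := cnt_key cs rank w sa hsort u t hut (by omega)
      rw [hKi, hKj] at hck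
      have h3 := tri_third _ _ _ _ (Iff.intro
          (fun h => (hck.1.1 h.symm).symm)
          (fun h => (hck.1.2 h.symm).symm)) hck.2
      rw [h3]
      exact hPK.1

-- the initial character ranks
theorem rank0_ok (cs : List Char) : RANKOK cs (cs.map pvOrd) 1 := by
  refine ⟨by simp, ?_, ?_⟩
  · intro i hi
    rw [List.getD_eq_getElem _ _ (by simpa using hi), List.getElem_map]
    simp [pvOrd]
  · intro i j hi hj
    rw [List.getD_eq_getElem _ _ (by simpa using hi), List.getD_eq_getElem _ _ (by simpa using hj),
        List.getElem_map, List.getElem_map]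
    have hki : keyw cs 1 i = [cs[i]] := by
      unfold keyw
      rw [List.drop_eq_getElem_cons hi]
      rfl
    have hkj : keyw cs 1 j = [cs[j]] := by
      unfold keyw
      rw [List.drop_eq_getElem_cons hj]
      rfl
    rw [hki, hkj]
    constructor
    · intro h
      have hc : cs[i] < cs[j] := by
        have : cs[i].toNat < cs[j].toNat := by
          simp only [pvOrd] at h
          exact_mod_cast h
        exact this
      exact List.cons_lt_cons_iff.2 (.inl hc)
    · intro h
      rcases List.cons_lt_cons_iff.1 h with h | ⟨-, h⟩
      · have : cs[i].toNat < cs[j].toNat := h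
        simp only [pvOrd]
        exact_mod_cast this
      · exact absurd h (List.not_lt_nil _)

-- the master induction on the doubling loop
theorem saLoop_eq (cs : List Char) :
    ∀ d w, ∀ hw : 0 < w, cs.length - w ≤ d → ∀ rank sa, RANKOK cs rank w →
      sa.Perm (PySem.List.pyRange 0 (cs.length : Int) 1) →
      (cs.length ≤ w → sa.Pairwise (fun a b => sfx cs a < sfx cs b)) →
      pvSALoop cs sa rank w hw = pvSufSort cs := by
  intro d
  induction d with
  | zero =>
    intro w hw hd rank sa hr hperm hs
    rw [pvSALoop, dif_neg (by omega)]
    exact SUF_unique cs sa hperm (hs (by omega))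
  | succ d ih =>
    intro w hw hd rank sa hr hperm hs
    by_cases hlt : w < cs.length
    · rw [pvSALoop, dif_pos hlt]
      have hperm' : (PySem.List.sorted2 sa (pvKey1 rank) (pvKey2 cs.length rank w) false).Perm
          (PySem.List.pyRange 0 (cs.length : Int) 1) :=
        (PySem.List.sorted2_perm sa (pvKey1 rank) (pvKey2 cs.length rank w) false).trans hperm
      have hsort : (PySem.List.sorted2 sa (pvKey1 rank) (pvKey2 cs.length rank w) false).Pairwise
          (fun a b => pKi cs rank w a ≤ pKi cs rank w b) := by
        rw [sorted2_eq_sortedLex]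
        exact PySem.List.sorted_pairwise _ _
      have hok2 : RANKOK cs (pvNewRank cs.length rank w
          (PySem.List.sorted2 sa (pvKey1 rank) (pvKey2 cs.length rank w) false)) (2 * w) := by
        rw [two_mul]
        exact newRank_ok cs rank w hw hr _ hperm' hsort
      apply ih (2 * w) (by omega) (by omega) _ _ hok2 hperm'
      -- if the doubled width covers the string, the sorted list is strictly suffix-sorted
      intro hn2
      have hnd : (PySem.List.sorted2 sa (pvKey1 rank) (pvKey2 cs.length rank w) false).Pairwise
          (fun a b : Int => a ≠ b) := perm_range_nodup _ _ hperm'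
      refine (hsort.and hnd).imp_of_mem ?_
      intro a b ha hb hab
      obtain ⟨h1, h2⟩ := hab
      have hA := PySem.List.mem_pyRange_one.1 (hperm'.subset ha)
      have hB := PySem.List.mem_pyRange_one.1 (hperm'.subset hb)
      have hea : ((a.toNat : Nat) : Int) = a := by omega
      have heb : ((b.toNat : Nat) : Int) = b := by omega
      have hia : a.toNat < cs.length := by omega
      have hib : b.toNat < cs.length := by omega
      have hPK := pKi_iff cs rank w hw hr a.toNat b.toNat hia hib
      rw [hea, heb] at hPK
      have hfa : keyw cs (w + w) a.toNat = cs.drop a.toNat := keyw_full cs (w + w) a.toNat (by omega)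
      have hfb : keyw cs (w + w) b.toNat = cs.drop b.toNat := keyw_full cs (w + w) b.toNat (by omega)
      rcases lt_or_eq_of_le h1 with h | h
      · have := hPK.1.1 h
        rw [hfa, hfb] at this
        exact this
      · have := hPK.2.1 h
        rw [hfa, hfb] at this
        exact absurd this (sfx_ne cs a.toNat b.toNat hia hib (by omega))
    · rw [pvSALoop, dif_neg hlt]
      exact SUF_unique cs sa hperm (hs (by omega))

theorem pvSuffixArray_eq (cs : List Char) : pvSuffixArray cs = pvSufSort cs := by
  unfold pvSuffixArray
  apply saLoop_eq cs cs.length 1 Nat.one_pos (by omega) _ _ (rank0_ok cs) (List.Perm.refl _)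
  intro h1
  rw [List.pairwise_iff_getElem]
  intro p q hp hq hpq
  rw [PySem.List.length_pyRange_one] at hp hq
  omega


-- ===== correctness of A's Kasai LCP computation (run on the sorted suffix list) =====

-- position of suffix i in the sorted suffix list
def posOf (cs : List Char) (i : Nat) : Nat := (pvSufSort cs).idxOf ((i : Int))

theorem posOf_lt (cs : List Char) (i : Nat) (hi : i < cs.length) : posOf cs i < cs.length := by
  have hm : ((i : Int)) ∈ pvSufSort cs := (SUF_mem cs _).2 ⟨by omega, by omega⟩
  have := List.idxOf_lt_length_of_mem hm
  rwa [SUF_length] at this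

theorem saN_posOf (cs : List Char) (i : Nat) (hi : i < cs.length) :
    saN cs (posOf cs i) = (i : Int) := by
  have hm : ((i : Int)) ∈ pvSufSort cs := (SUF_mem cs _).2 ⟨by omega, by omega⟩
  have hlt : posOf cs i < (pvSufSort cs).length := List.idxOf_lt_length_of_mem hm
  rw [saN, List.getD_eq_getElem _ _ hlt]
  exact List.getElem_idxOf hlt

theorem posOf_saN (cs : List Char) (r : Nat) (hr : r < cs.length) :
    posOf cs (saN cs r).toNat = r := by
  have hb := saN_bounds cs r hr
  have h1 : (saN cs r).toNat < cs.length := by omega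
  apply saN_inj cs _ _ (posOf_lt cs _ h1) hr
  rw [saN_posOf cs _ h1]
  omega

theorem posOf_mono (cs : List Char) (i i' : Nat) (hi : i < cs.length) (hi' : i' < cs.length)
    (h : sfx cs (i : Int) < sfx cs (i' : Int)) : posOf cs i < posOf cs i' := by
  rcases Nat.lt_trichotomy (posOf cs i) (posOf cs i') with hx | hx | hx
  · exact hx
  · exfalso
    have := congrArg (saN cs) hx
    rw [saN_posOf cs i hi, saN_posOf cs i' hi'] at this
    rw [this] at h
    exact absurd h (lt_irrefl _)
  · exfalso
    have := sfxr_lt cs (posOf cs i') (posOf cs i) hx (posOf_lt cs i hi)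
    rw [saN_posOf cs i hi, saN_posOf cs i' hi'] at this
    exact absurd (lt_trans h this) (lt_irrefl _)

-- the rank array built by kasai_lcp is the position map
theorem rankOf_spec (cs : List Char) :
    (pvRankOf cs.length (pvSufSort cs)).length = cs.length ∧
    ∀ i : Nat, i < cs.length →
      (pvRankOf cs.length (pvSufSort cs)).getD i 0 = ((posOf cs i : Nat) : Int) := by
  set n := cs.length with hn
  set sa := pvSufSort cs with hsa
  have hperm := SUF_perm cs
  have hsalen : sa.length = n := SUF_length cs
  set step := fun (r : List Int) (i : Int) =>
      PySem.List.pySetD r (PySem.List.pyGetD sa i 0) i with hstep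
  have hrepeat : PySem.List.pyRepeat [(0 : Int)] (n : Int) = List.replicate n 0 := by
    rw [PySem.List.pyRepeat_singleton]
    simp
  have main : ∀ m : Nat, m ≤ n →
      ((PySem.List.pyRange 0 (m : Int) 1).foldl step (List.replicate n 0)).length = n ∧
      ∀ t : Nat, t < m →
        ((PySem.List.pyRange 0 (m : Int) 1).foldl step (List.replicate n 0)).getD
            (sa.getD t 0).toNat 0 = (t : Int) := by
    intro m
    induction m with
    | zero =>
      intro _
      rw [show ((0 : Nat) : Int) = 0 by norm_num, PySem.List.pyRange_one_eq_nil le_rfl]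
      exact ⟨by simp, fun t ht => absurd ht (by omega)⟩
    | succ m ih =>
      intro hm
      obtain ⟨ihlen, ihval⟩ := ih (by omega)
      have hsplit : PySem.List.pyRange 0 ((m + 1 : Nat) : Int) 1 =
          PySem.List.pyRange 0 (m : Int) 1 ++ [(m : Int)] := by
        rw [show ((m + 1 : Nat) : Int) = (m : Int) + 1 by push_cast; ring]
        exact PySem.List.pyRange_one_succ_right (by omega)
      rw [hsplit, List.foldl_append]
      set F := (PySem.List.pyRange 0 (m : Int) 1).foldl step (List.replicate n 0) with hF
      have ha : 0 ≤ sa.getD m 0 ∧ sa.getD m 0 < (n : Int) :=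
        perm_range_bounds n sa hperm m (by omega)
      have hstepm : List.foldl step F [(m : Int)] = F.set (sa.getD m 0).toNat (m : Int) := by
        simp only [List.foldl_cons, List.foldl_nil, hstep]
        rw [PySem.List.pyGetD_natCast, PySem.List.pySetD_of_nonneg _ _ ha.1]
      rw [hstepm]
      constructor
      · rw [List.length_set, ihlen]
      · intro t ht
        by_cases hteq : t = m
        · subst hteq
          rw [List.getD_eq_getElem _ _ (by rw [List.length_set, ihlen]; omega)]
          rw [List.getElem_set_self]
        · have hbt := perm_range_bounds n sa hperm t (by omega)
          have hne : (sa.getD t 0).toNat ≠ (sa.getD m 0).toNat := by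
            have := perm_range_getD_ne n sa hperm t m (by omega) (by omega) hteq
            omega
          rw [List.getD_eq_getElem _ _ (by rw [List.length_set, ihlen]; omega)]
          rw [List.getElem_set_ne (Ne.symm hne)]
          rw [← List.getD_eq_getElem F 0 (by rw [ihlen]; omega)]
          exact ihval t (by omega)
  obtain ⟨hlen, hval⟩ := main n le_rfl
  have hres : pvRankOf n sa = (PySem.List.pyRange 0 (n : Int) 1).foldl step (List.replicate n 0) := by
    unfold pvRankOf
    rw [hrepeat]
  constructor
  · rw [hres]; exact hlen
  · intro i hi
    have hpos := posOf_lt cs i hi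
    have hv := hval (posOf cs i) (by omega)
    have he : sa.getD (posOf cs i) 0 = (i : Int) := saN_posOf cs i hi
    rw [he] at hv
    simp only [Int.toNat_natCast] at hv
    rw [hres]
    exact hv

-- heads of two suffixes with a positive common prefix agree
theorem lcpLen_pos_heads (cs : List Char) (i j : Nat) (hi : i < cs.length) (hj : j < cs.length)
    (h : 1 ≤ lcpLen (cs.drop i) (cs.drop j)) : cs[i] = cs[j] := by
  obtain ⟨-, -, h3⟩ := (lcpLen_succ_le_iff (cs.drop i) (cs.drop j) 0 (by omega)).1 h
  rw [List.getElem?_drop, List.getElem?_drop] at h3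
  simp only [Nat.add_zero] at h3
  rw [List.getElem?_eq_getElem hi, List.getElem?_eq_getElem hj] at h3
  exact Option.some.inj h3

-- the LCP value at sorted position r
def ellv (cs : List Char) (r : Nat) : Nat := lcpLen (sfx cs (saN cs (r - 1))) (sfx cs (saN cs r))

theorem kasai_spec (cs : List Char) :
    (pvKasai cs (pvSufSort cs)).length = cs.length ∧
    ∀ r : Nat, 1 ≤ r → r < cs.length →
      (pvKasai cs (pvSufSort cs)).getD r 0 = (ellv cs r : Int) := by
  set n := cs.length with hn
  set sa := pvSufSort cs with hsa
  obtain ⟨hrklen, hrkval⟩ := rankOf_spec cs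
  set rank := pvRankOf n sa with hrank
  set step := fun (st : List Int × Int) (i : Int) =>
      let ri := PySem.List.pyGetD rank i 0
      if ri = 0 then (st.1, 0)
      else
        let j := PySem.List.pyGetD sa (ri - 1) 0
        let h := pvExtend cs i j st.2
        (PySem.List.pySetD st.1 ri h, if 0 < h then h - 1 else h) with hstep
  have hkasai : pvKasai cs sa = ((PySem.List.pyRange 0 (n : Int) 1).foldl step
      (PySem.List.pyRepeat [(0 : Int)] (n : Int), 0)).1 := rfl
  have hrepeat : PySem.List.pyRepeat [(0 : Int)] (n : Int) = List.replicate n 0 := by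
    rw [PySem.List.pyRepeat_singleton]
    simp
  -- the bound carried by Kasai's h between iterations
  set HB := fun (m : Nat) (h : Int) => (0 ≤ h ∧ (m < n → 1 ≤ posOf cs m →
      h.toNat ≤ lcpLen (sfx cs (m : Int)) (sfx cs (saN cs (posOf cs m - 1))))) with hHB
  have main : ∀ m : Nat, m ≤ n →
      ((PySem.List.pyRange 0 (m : Int) 1).foldl step (List.replicate n 0, 0)).1.length = n ∧
      (∀ r : Nat, 1 ≤ r → r < n → (saN cs r).toNat < m →
        ((PySem.List.pyRange 0 (m : Int) 1).foldl step (List.replicate n 0, 0)).1.getD r 0 =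
          (ellv cs r : Int)) ∧
      HB m ((PySem.List.pyRange 0 (m : Int) 1).foldl step (List.replicate n 0, 0)).2 := by
    intro m
    induction m with
    | zero =>
      intro _
      rw [show ((0 : Nat) : Int) = 0 by norm_num, PySem.List.pyRange_one_eq_nil le_rfl]
      refine ⟨by simp, fun r h1 h2 h3 => absurd h3 (by omega), by simp [hHB]⟩
    | succ m ih =>
      intro hm
      obtain ⟨ihlen, ihval, ihHB⟩ := ih (by omega)
      have hsplit : PySem.List.pyRange 0 ((m + 1 : Nat) : Int) 1 =
          PySem.List.pyRange 0 (m : Int) 1 ++ [(m : Int)] := by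
        rw [show ((m + 1 : Nat) : Int) = (m : Int) + 1 by push_cast; ring]
        exact PySem.List.pyRange_one_succ_right (by omega)
      rw [hsplit, List.foldl_append]
      set F := (PySem.List.pyRange 0 (m : Int) 1).foldl step (List.replicate n 0, 0) with hF
      have hmn : m < n := by omega
      have hri : PySem.List.pyGetD rank (m : Int) 0 = ((posOf cs m : Nat) : Int) := by
        rw [PySem.List.pyGetD_natCast]
        exact hrkval m hmn
      simp only [List.foldl_cons, List.foldl_nil]
      by_cases hp0 : posOf cs m = 0
      · -- rank[i] == 0: reset h to 0
        have : step F (m : Int) = (F.1, 0) := by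
          rw [hstep]
          simp only [hri, hp0]
          rw [if_pos (by norm_num)]
        rw [this]
        refine ⟨ihlen, ?_, ?_⟩
        · intro r h1 h2 h3
          by_cases hrm : (saN cs r).toNat = m
          · exfalso
            have : r = posOf cs m := by
              rw [← posOf_saN cs r h2, hrm]
            omega
          · exact ihval r h1 h2 (by omega)
        · refine ⟨le_refl 0, ?_⟩
          intro _ _
          simp
      · -- rank[i] ≠ 0: extend, write, decrement
        have hp1 : 1 ≤ posOf cs m := by omega
        have hplt : posOf cs m < n := posOf_lt cs m hmn
        have hrine : ((posOf cs m : Nat) : Int) ≠ 0 := by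
          simp only [ne_eq, Int.natCast_eq_zero]
          omega
        have hjval : PySem.List.pyGetD sa (((posOf cs m : Nat) : Int) - 1) 0 =
            saN cs (posOf cs m - 1) := by
          rw [show ((posOf cs m : Nat) : Int) - 1 = ((posOf cs m - 1 : Nat) : Int) by omega]
          rw [PySem.List.pyGetD_natCast]
          rfl
        set j := saN cs (posOf cs m - 1) with hj
        have hjb := saN_bounds cs (posOf cs m - 1) (by omega)
        have hLb := ihHB.2 hmn hp1
        have hext : pvExtend cs (m : Int) j F.2 =
            (lcpLen (sfx cs (m : Int)) (sfx cs j) : Int) :=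
          pvExtend_eq cs _ j F.2 (by omega) hjb.1 ihHB.1 hLb
        set L := lcpLen (sfx cs (m : Int)) (sfx cs j) with hL
        have hstepm : step F (m : Int) =
            (PySem.List.pySetD F.1 ((posOf cs m : Nat) : Int) (L : Int),
              if 0 < (L : Int) then (L : Int) - 1 else (L : Int)) := by
          rw [hstep]
          simp only [hri]
          rw [if_neg hrine, hjval, hext]
        rw [hstepm]
        have hset : PySem.List.pySetD F.1 ((posOf cs m : Nat) : Int) (L : Int) =
            F.1.set (posOf cs m) (L : Int) := by
          rw [PySem.List.pySetD_of_nonneg _ _ (by omega)]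
          simp
        rw [hset]
        refine ⟨by rw [List.length_set, ihlen], ?_, ?_⟩
        · intro r h1 h2 h3
          by_cases hrm : (saN cs r).toNat = m
          · have hre : r = posOf cs m := by
              rw [← posOf_saN cs r h2, hrm]
            subst hre
            rw [List.getD_eq_getElem _ _ (by rw [List.length_set, ihlen]; omega)]
            rw [List.getElem_set_self]
            rw [hL, ellv, ← hj]
            have hsm : saN cs (posOf cs m) = (m : Int) := saN_posOf cs m hmn
            rw [hsm, lcpLen_comm]
          · have hrne : r ≠ posOf cs m := by
              intro he
              rw [he, saN_posOf cs m hmn] at hrm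
              exact hrm (by omega)
            rw [List.getD_eq_getElem _ _ (by rw [List.length_set, ihlen]; omega)]
            rw [List.getElem_set_ne (by omega)]
            rw [← List.getD_eq_getElem F.1 0 (by rw [ihlen]; omega)]
            exact ihval r h1 h2 (by omega)
        · -- the next h bound
          constructor
          · split <;> omega
          · intro hm1 hq1
            by_cases hL0 : L = 0
            · rw [hL0]
              simp
            · have hL1 : 1 ≤ L := by omega
              rw [if_pos (by exact_mod_cast Nat.pos_of_ne_zero hL0)]
              rw [show ((L : Int) - 1).toNat = L - 1 by omega]
              -- j + 1 may run off the end; then L = 1 and the bound is trivial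
              by_cases hjend : j.toNat + 1 < n
              · -- suffix j+1 sits strictly before suffix m+1 in sorted order
                have hjn : j.toNat < n := by omega
                have hheads : cs[m] = cs[j.toNat] := by
                  apply lcpLen_pos_heads cs m j.toNat hmn hjn
                  have : sfx cs (m : Int) = cs.drop m := by simp [sfx]
                  have h2 : sfx cs j = cs.drop j.toNat := rfl
                  rw [this, h2] at hL
                  omega
                have hLsucc : lcpLen (cs.drop (j.toNat + 1)) (cs.drop (m + 1)) = L - 1 := by
                  have := lcpLen_drop_succ cs j.toNat m hjn hmn (hheads.symm)
                  have he : lcpLen (cs.drop j.toNat) (cs.drop m) = L := by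
                    rw [hL, lcpLen_comm]
                    rfl
                  omega
                have hord : sfx cs j < sfx cs (m : Int) := by
                  have := sfxr_lt cs (posOf cs m - 1) (posOf cs m) (by omega) hplt
                  rwa [← hj, saN_posOf cs m hmn] at this
                have htail : cs.drop (j.toNat + 1) < cs.drop (m + 1) := by
                  apply drop_lt_drop_succ cs j.toNat m hjn hmn (hheads.symm)
                  have h1 : sfx cs j = cs.drop j.toNat := rfl
                  have h2 : sfx cs (m : Int) = cs.drop m := by simp [sfx]
                  rw [h1, h2] at hord
                  exact hord
                have hm1n : m + 1 < n := hm1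
                have hposlt : posOf cs (j.toNat + 1) < posOf cs (m + 1) := by
                  apply posOf_mono cs _ _ hjend hm1n
                  have e1 : sfx cs ((j.toNat + 1 : Nat) : Int) = cs.drop (j.toNat + 1) := by
                    unfold sfx; congr 1 <;> omega
                  have e2 : sfx cs ((m + 1 : Nat) : Int) = cs.drop (m + 1) := by
                    unfold sfx; congr 1 <;> omega
                  rw [e1, e2]
                  exact htail
                set q := posOf cs (m + 1) with hq
                set p := posOf cs (j.toNat + 1) with hp
                -- chain through the immediate predecessor at position q - 1
                have hqn : q < n := posOf_lt cs (m + 1) hm1n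
                have hchain : lcpLen (sfx cs (saN cs p)) (sfx cs (saN cs q)) =
                    min (lcpLen (sfx cs (saN cs p)) (sfx cs (saN cs (q - 1))))
                        (lcpLen (sfx cs (saN cs (q - 1))) (sfx cs (saN cs q))) := by
                  apply lcpLen_chain
                  · rcases Nat.lt_or_ge p (q - 1) with hx | hx
                    · exact .inl (sfxr_lt cs p (q - 1) hx (by omega))
                    · have : p = q - 1 := by omega
                      rw [this]
                      exact .inr rfl
                  · exact .inl (sfxr_lt cs (q - 1) q (by omega) hqn)
                have hpe : saN cs p = ((j.toNat + 1 : Nat) : Int) := saN_posOf cs _ hjend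
                have hqe : saN cs q = ((m + 1 : Nat) : Int) := saN_posOf cs _ hm1n
                have hLpq : lcpLen (sfx cs (saN cs p)) (sfx cs (saN cs q)) = L - 1 := by
                  rw [hpe, hqe]
                  have e1 : sfx cs ((j.toNat + 1 : Nat) : Int) = cs.drop (j.toNat + 1) := by
                    unfold sfx; congr 1 <;> omega
                  have e2 : sfx cs ((m + 1 : Nat) : Int) = cs.drop (m + 1) := by
                    unfold sfx; congr 1 <;> omega
                  rw [e1, e2]
                  exact hLsucc
                have hfinal : L - 1 ≤ lcpLen (sfx cs (saN cs (q - 1))) (sfx cs (saN cs q)) := by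
                  rw [← hLpq, hchain]
                  exact min_le_right _ _
                have e2 : sfx cs ((m + 1 : Nat) : Int) = cs.drop (m + 1) := by
                  unfold sfx; congr 1 <;> omega
                rw [e2]
                rw [lcpLen_comm] at hfinal
                calc L - 1 ≤ lcpLen (sfx cs (saN cs q)) (sfx cs (saN cs (q - 1))) := hfinal
                  _ = lcpLen (cs.drop (m + 1)) (sfx cs (saN cs (posOf cs (m + 1) - 1))) := by
                      rw [hqe]
                      have e3 : sfx cs ((m + 1 : Nat) : Int) = cs.drop (m + 1) := by
                        unfold sfx; congr 1 <;> omega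
                      rw [e3]
              · -- j + 1 = n: the suffix at j has length 1, so L = 1 and L - 1 = 0
                have : L ≤ n - j.toNat := by
                  have := lcpLen_le_right (sfx cs (m : Int)) (sfx cs j)
                  have hlenj : (sfx cs j).length = n - j.toNat := by
                    unfold sfx; rw [List.length_drop, hn]
                  omega
                have : L = 1 := by omega
                simp [this]
  obtain ⟨hlen, hval, _⟩ := main n le_rfl
  rw [hkasai, hrepeat]
  constructor
  · exact hlen
  · intro r h1 h2
    have hb := saN_bounds cs r h2
    exact hval r h1 h2 (by omega)


-- ===== the monotonic deque of A computes sliding-window minima of the LCP array =====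

-- left end of the window of deque indices kept at step i0
def loI (k i0 : Int) : Int := max 1 (i0 - k + 2)

-- t survives all pops up to step i0
def stairB (L : List Int) (t i0 : Int) : Bool :=
  (PySem.List.pyRange (t + 1) (i0 + 1) 1).all
    (fun u => decide (PySem.List.pyGetD L t 0 < PySem.List.pyGetD L u 0))

-- the deque contents after processing i = 1 .. i0
def DQ (L : List Int) (k i0 : Int) : List Int :=
  (PySem.List.pyRange (loI k i0) (i0 + 1) 1).filter (fun t => stairB L t i0)

theorem stair_iff (L : List Int) (t i0 : Int) :
    stairB L t i0 = true ↔
      ∀ u : Int, t < u → u ≤ i0 → PySem.List.pyGetD L t 0 < PySem.List.pyGetD L u 0 := by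
  unfold stairB
  rw [List.all_eq_true]
  constructor
  · intro h u h1 h2
    have := h u (PySem.List.mem_pyRange_one.2 ⟨by omega, by omega⟩)
    exact of_decide_eq_true this
  · intro h u hu
    have := PySem.List.mem_pyRange_one.1 hu
    exact decide_eq_true (h u (by omega) (by omega))

theorem mem_DQ (L : List Int) (k i0 t : Int) :
    t ∈ DQ L k i0 ↔ loI k i0 ≤ t ∧ t ≤ i0 ∧
      (∀ u : Int, t < u → u ≤ i0 → PySem.List.pyGetD L t 0 < PySem.List.pyGetD L u 0) := by
  unfold DQ
  rw [List.mem_filter, PySem.List.mem_pyRange_one, ← stair_iff]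
  constructor
  · rintro ⟨⟨h1, h2⟩, h3⟩
    exact ⟨h1, by omega, h3⟩
  · rintro ⟨h1, h2, h3⟩
    exact ⟨⟨h1, by omega⟩, h3⟩

theorem DQ_sorted (L : List Int) (k i0 : Int) : (DQ L k i0).Pairwise (· < ·) :=
  List.Pairwise.sublist List.filter_sublist (PySem.List.pairwise_lt_pyRange_one _ _)

theorem DQ_lv_sorted (L : List Int) (k i0 : Int) :
    (DQ L k i0).Pairwise (fun a b => PySem.List.pyGetD L a 0 < PySem.List.pyGetD L b 0) := by
  refine (DQ_sorted L k i0).imp_of_mem ?_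
  intro a b ha hb hab
  obtain ⟨h1, h2, h3⟩ := (mem_DQ L k i0 a).1 ha
  obtain ⟨g1, g2, g3⟩ := (mem_DQ L k i0 b).1 hb
  exact h3 b hab g2

theorem popFront_eq_dropWhile (b : Int) (l : List Int) :
    pvPopFront b l = l.dropWhile (fun t => decide (t ≤ b)) := by
  induction l with
  | nil => rfl
  | cons x xs ih =>
    simp only [pvPopFront, List.dropWhile_cons]
    by_cases h : x ≤ b
    · rw [if_pos h, if_pos (decide_eq_true h), ih]
    · rw [if_neg h, if_neg (by simpa using h)]

theorem popBack_filter (L : List Int) (v : Int) (dq : List Int)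
    (hpw : dq.Pairwise (fun a b => PySem.List.pyGetD L a 0 < PySem.List.pyGetD L b 0)) :
    pvPopBack L v dq = dq.filter (fun t => decide (PySem.List.pyGetD L t 0 < v)) := by
  induction dq using List.reverseRecOn with
  | nil => simp [pvPopBack]
  | append_singleton ys y ih =>
    have hne : ys ++ [y] ≠ [] := by simp
    rw [pvPopBack, dif_neg hne]
    have hlast : (ys ++ [y]).getLast hne = y := List.getLast_concat
    rw [hlast]
    obtain ⟨hys, -, hrel⟩ := List.pairwise_append.1 hpw
    by_cases h : v ≤ PySem.List.pyGetD L y 0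
    · rw [if_pos h, List.dropLast_concat, ih hys, List.filter_append]
      have : List.filter (fun t => decide (PySem.List.pyGetD L t 0 < v)) [y] = [] := by
        simp only [List.filter_cons, List.filter_nil]
        rw [if_neg (by simpa using not_lt.2 h)]
      rw [this, List.append_nil]
    · rw [if_neg h]
      refine (List.filter_eq_self.2 ?_).symm
      intro a ha
      rcases List.mem_append.1 ha with ha | ha
      · have h1 := hrel a ha y (by simp)
        have h2 : PySem.List.pyGetD L y 0 < v := not_le.1 h
        exact decide_eq_true (lt_trans h1 h2)
      · have : a = y := by simpa using ha
        subst this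
        exact decide_eq_true (not_le.1 h)

-- one step of A's deque: pop from the back, append i, (for i ≥ k-1) pop from the front
theorem DQ_step_back (L : List Int) (k i0 : Int) (hk : 2 ≤ k) (hi0 : 0 ≤ i0) :
    pvPopBack L (PySem.List.pyGetD L (i0 + 1) 0) (DQ L k i0) ++ [i0 + 1] =
      (PySem.List.pyRange (loI k i0) (i0 + 2) 1).filter (fun t => stairB L t (i0 + 1)) := by
  rw [popBack_filter L _ _ (DQ_lv_sorted L k i0)]
  unfold DQ
  rw [List.filter_filter]
  have hsplit : PySem.List.pyRange (loI k i0) (i0 + 2) 1 =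
      PySem.List.pyRange (loI k i0) (i0 + 1) 1 ++ [i0 + 1] := by
    rw [show i0 + 2 = (i0 + 1) + 1 by ring]
    exact PySem.List.pyRange_one_succ_right (by unfold loI; omega)
  rw [hsplit, List.filter_append]
  congr 1
  · apply List.filter_congr
    intro t ht
    have hti := PySem.List.mem_pyRange_one.1 ht
    rw [Bool.eq_iff_iff]
    simp only [Bool.and_eq_true, decide_eq_true_eq, stair_iff]
    constructor
    · rintro ⟨h1, h2⟩
      intro u hu1 hu2
      rcases eq_or_lt_of_le hu2 with he | hl
      · rw [he]; exact h1
      · exact h2 u hu1 (by omega)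
    · intro h
      exact ⟨h (i0 + 1) (by omega) le_rfl, fun u h1 h2 => h u h1 (by omega)⟩
  · simp only [List.filter_cons, List.filter_nil]
    rw [if_pos]
    rw [stair_iff]
    intro u h1 h2
    omega

theorem DQ_step_front (L : List Int) (k i0 : Int) (hk : 2 ≤ k) (hi0 : 0 ≤ i0)
    (hki : k - 1 ≤ i0 + 1) :
    pvPopFront (i0 + 1 - k + 1)
        ((PySem.List.pyRange (loI k i0) (i0 + 2) 1).filter (fun t => stairB L t (i0 + 1))) =
      DQ L k (i0 + 1) := by
  rw [popFront_eq_dropWhile]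
  unfold DQ
  have hlo : loI k (i0 + 1) = i0 + 1 - k + 2 := by unfold loI; omega
  have hlo0 : loI k i0 ≤ loI k (i0 + 1) := by unfold loI; omega
  have hsplit : PySem.List.pyRange (loI k i0) (i0 + 2) 1 =
      PySem.List.pyRange (loI k i0) (loI k (i0 + 1)) 1 ++
        PySem.List.pyRange (loI k (i0 + 1)) (i0 + 2) 1 := by
    apply PySem.List.pyRange_one_append _ _ _ hlo0
    unfold loI
    omega
  rw [hsplit, List.filter_append, List.dropWhile_append]
  have h1 : (List.dropWhile (fun t => decide (t ≤ i0 + 1 - k + 1))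
      ((PySem.List.pyRange (loI k i0) (loI k (i0 + 1)) 1).filter
        (fun t => stairB L t (i0 + 1)))).isEmpty = true := by
    rw [List.isEmpty_iff, List.dropWhile_eq_nil_iff]
    intro x hx
    have := PySem.List.mem_pyRange_one.1 (List.mem_of_mem_filter hx)
    simp only [decide_eq_true_eq]
    omega
  rw [if_pos h1]
  rw [show i0 + 1 + 1 = i0 + 2 from by ring]
  apply List.dropWhile_eq_self_iff.2
  intro hl
  have hmem := List.getElem_mem hl
  have := PySem.List.mem_pyRange_one.1 (List.mem_of_mem_filter hmem)
  simp only [decide_eq_true_eq]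
  omega


theorem self_mem_DQ (L : List Int) (k i : Int) (hk : 2 ≤ k) (hi : 1 ≤ i) : i ∈ DQ L k i := by
  rw [mem_DQ]
  refine ⟨by unfold loI; omega, le_rfl, ?_⟩
  intro u h1 h2
  omega

theorem head_min (L : List Int) (k i : Int) (hk : 2 ≤ k) (hi : 1 ≤ i) (t0 : Int) (rest : List Int)
    (hdq : DQ L k i = t0 :: rest) :
    loI k i ≤ t0 ∧ t0 ≤ i ∧
      ∀ u : Int, loI k i ≤ u → u ≤ i →
        PySem.List.pyGetD L t0 0 ≤ PySem.List.pyGetD L u 0 := by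
  have ht0mem : t0 ∈ DQ L k i := by rw [hdq]; simp
  obtain ⟨h1, h2, h3⟩ := (mem_DQ L k i t0).1 ht0mem
  refine ⟨h1, h2, ?_⟩
  have hge : ∀ x ∈ DQ L k i, t0 ≤ x := by
    intro x hx
    rw [hdq] at hx
    rcases List.mem_cons.1 hx with rfl | hx
    · exact le_rfl
    · have hpw := DQ_sorted L k i
      rw [hdq] at hpw
      have := List.rel_of_pairwise_cons hpw hx
      omega
  have main : ∀ d : Nat, ∀ u : Int, loI k i ≤ u → u ≤ i → (t0 - u).toNat ≤ d →
      PySem.List.pyGetD L t0 0 ≤ PySem.List.pyGetD L u 0 := by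
    intro d
    induction d with
    | zero =>
      intro u hu1 hu2 hd
      have hu : t0 ≤ u := by omega
      rcases eq_or_lt_of_le hu with he | hl
      · rw [he]
      · exact le_of_lt (h3 u hl hu2)
    | succ d ih =>
      intro u hu1 hu2 hd
      rcases lt_trichotomy t0 u with h | h | h
      · exact le_of_lt (h3 u h hu2)
      · rw [h]
      · have hnot : ¬ (∀ v : Int, u < v → v ≤ i →
            PySem.List.pyGetD L u 0 < PySem.List.pyGetD L v 0) := by
          intro hall
          exact absurd (hge u ((mem_DQ L k i u).2 ⟨hu1, hu2, hall⟩)) (by omega)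
        push_neg at hnot
        obtain ⟨v, hv1, hv2, hv3⟩ := hnot
        rcases lt_trichotomy v t0 with hvt | hvt | hvt
        · have := ih v (by omega) hv2 (by omega)
          omega
        · rw [hvt] at hv3
          exact hv3
        · have := h3 v hvt hv2
          omega
  intro u hu1 hu2
  exact main (t0 - u).toNat u hu1 hu2 le_rfl

-- one iteration of A's loop, on a deque-shaped state, below the window threshold
theorem stepA_small (k : Int) (sa L : List Int) (hk : 2 ≤ k) (i0 : Int) (hi0 : 0 ≤ i0)
    (mx st : Int) (h : ¬ (k - 1 ≤ i0 + 1)) :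
    pvStepA k sa L (DQ L k i0, mx, st) (i0 + 1) = (DQ L k (i0 + 1), mx, st) := by
  unfold pvStepA
  simp only
  rw [if_neg h]
  have hback := DQ_step_back L k i0 hk hi0
  have hlo : loI k i0 = loI k (i0 + 1) := by unfold loI; omega
  rw [hback, hlo]
  unfold DQ
  rw [show i0 + 1 + 1 = i0 + 2 from by ring]

-- one iteration of A's loop at or above the window threshold
theorem stepA_big (k : Int) (sa L : List Int) (hk : 2 ≤ k) (i0 : Int) (hi0 : 0 ≤ i0)
    (mx st : Int) (h : k - 1 ≤ i0 + 1) (t0 : Int) (rest : List Int)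
    (hdq : DQ L k (i0 + 1) = t0 :: rest) :
    pvStepA k sa L (DQ L k i0, mx, st) (i0 + 1) =
      (DQ L k (i0 + 1),
        if mx < PySem.List.pyGetD L t0 0 then
          (PySem.List.pyGetD L t0 0, PySem.List.pyGetD sa (i0 + 1) 0)
        else (mx, st)) := by
  unfold pvStepA
  simp only
  rw [if_pos h]
  have hback := DQ_step_back L k i0 hk hi0
  rw [hback]
  have hfront := DQ_step_front L k i0 hk hi0 h
  rw [hfront, hdq]
  show (if mx < PySem.List.pyGetD L t0 0 then
      (t0 :: rest, PySem.List.pyGetD L t0 0, PySem.List.pyGetD sa (i0 + 1) 0)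
    else (t0 :: rest, mx, st)) =
    (t0 :: rest, if mx < PySem.List.pyGetD L t0 0 then
      (PySem.List.pyGetD L t0 0, PySem.List.pyGetD sa (i0 + 1) 0) else (mx, st))
  by_cases hlt : mx < PySem.List.pyGetD L t0 0
  · rw [if_pos hlt, if_pos hlt]
  · rw [if_neg hlt, if_neg hlt]


-- the LCP list A's main loop reads
def LK (cs : List Char) : List Int := pvKasai cs (pvSufSort cs)

theorem lv_ell (cs : List Char) (t : Nat) (h1 : 1 ≤ t) (h2 : t < cs.length) :
    PySem.List.pyGetD (LK cs) (t : Int) 0 = (ellv cs t : Int) := by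
  rw [PySem.List.pyGetD_natCast]
  exact (kasai_spec cs).2 t h1 h2

-- the head of the deque holds the lcp of the first and last suffix of the current block
theorem winmin_eq_block (cs : List Char) (k i : Int) (hk : 2 ≤ k) (hki : k - 1 ≤ i)
    (hiN : i < (cs.length : Int)) (t0 : Int) (rest : List Int)
    (hdq : DQ (LK cs) k i = t0 :: rest) :
    PySem.List.pyGetD (LK cs) t0 0 =
      (lcpLen (sfx cs (saN cs (i - k + 1).toNat)) (sfx cs (saN cs i.toNat)) : Int) := by
  have hi1 : 1 ≤ i := by omega
  obtain ⟨h1, h2, hmin⟩ := head_min (LK cs) k i hk hi1 t0 rest hdq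
  have hlo : loI k i = i - k + 2 := by unfold loI; omega
  set p := (i - k + 1).toNat with hp
  set q := i.toNat with hq
  have hpq : p < q := by omega
  have hqn : q < cs.length := by omega
  obtain ⟨⟨ts, hts1, hts2, hts3⟩, hall⟩ := block_lcp cs p q hpq hqn
  have hup : PySem.List.pyGetD (LK cs) t0 0 ≤
      (lcpLen (sfx cs (saN cs p)) (sfx cs (saN cs q)) : Int) := by
    have hm := hmin (ts : Int) (by omega) (by omega)
    rw [lv_ell cs ts (by omega) (by omega)] at hm
    rw [hts3]
    exact hm
  have hlow : (lcpLen (sfx cs (saN cs p)) (sfx cs (saN cs q)) : Int) ≤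
      PySem.List.pyGetD (LK cs) t0 0 := by
    have ha := hall t0.toNat (by omega) (by omega)
    have ht0n : t0 = ((t0.toNat : Nat) : Int) := by omega
    rw [ht0n, lv_ell cs t0.toNat (by omega) (by omega)]
    exact_mod_cast ha
  omega

-- named states of the two main folds
def AF (cs : List Char) (k : Int) (m : Nat) : List Int × Int × Int :=
  (PySem.List.pyRange 1 (m : Int) 1).foldl (pvStepA k (pvSufSort cs) (LK cs)) ([], 0, 0)

def BF (cs : List Char) (k : Int) (m : Nat) : List Char :=
  (PySem.List.pyRange 0 ((m : Int) - k + 1) 1).foldl (pvStepB cs k (pvSufSort cs)) []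

theorem AF_succ (cs : List Char) (k : Int) (m : Nat) (hm : 1 ≤ m) :
    AF cs k (m + 1) = pvStepA k (pvSufSort cs) (LK cs) (AF cs k m) (m : Int) := by
  unfold AF
  rw [show ((m + 1 : Nat) : Int) = (m : Int) + 1 by push_cast; ring,
      PySem.List.pyRange_one_succ_right (by omega), List.foldl_append]
  rfl

theorem BF_succ (cs : List Char) (k : Int) (m : Nat) (hm : k - 1 ≤ (m : Int)) :
    BF cs k (m + 1) = pvStepB cs k (pvSufSort cs) (BF cs k m) ((m : Int) - k + 1) := by
  unfold BF
  rw [show ((m + 1 : Nat) : Int) - k + 1 = ((m : Int) - k + 1) + 1 by push_cast; ring,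
      PySem.List.pyRange_one_succ_right (by omega), List.foldl_append]
  rfl

theorem foldA_small (cs : List Char) (k : Int) (hk : 2 ≤ k) :
    ∀ m : Nat, 1 ≤ m → m ≤ cs.length → (m : Int) ≤ k - 1 →
      AF cs k m = (DQ (LK cs) k ((m : Int) - 1), 0, 0) := by
  intro m
  induction m with
  | zero => omega
  | succ m ih =>
    intro _ hle hk1
    by_cases hm0 : m = 0
    · subst hm0
      unfold AF
      rw [show ((0 + 1 : Nat) : Int) = 1 by simp, PySem.List.pyRange_one_eq_nil le_rfl]
      simp only [List.foldl_nil]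
      have hdq0 : DQ (LK cs) k ((1 : Int) - 1) = [] := by
        unfold DQ
        rw [PySem.List.pyRange_one_eq_nil (by unfold loI; omega)]
        rfl
      rw [hdq0]
    · have hm1 : 1 ≤ m := by omega
      rw [AF_succ cs k m hm1, ih hm1 (by omega) (by push_cast at hk1 ⊢; omega)]
      have := stepA_small k (pvSufSort cs) (LK cs) hk ((m : Int) - 1) (by omega) 0 0
        (by push_cast at hk1; omega)
      rw [show ((m : Int) - 1) + 1 = (m : Int) by ring] at this
      rw [this]
      rw [show ((m + 1 : Nat) : Int) - 1 = (m : Int) by push_cast; ring]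

-- the joint invariant of A's and B's main loops
theorem foldAB (cs : List Char) (k : Int) (hk : 2 ≤ k) :
    ∀ m : Nat, k - 1 ≤ (m : Int) → m ≤ cs.length →
      (AF cs k m).1 = DQ (LK cs) k ((m : Int) - 1) ∧
      (AF cs k m).2.1 = ((BF cs k m).length : Int) ∧
      (0 < (AF cs k m).2.1 →
        PySem.List.slice cs (some (AF cs k m).2.2)
          (some ((AF cs k m).2.2 + (AF cs k m).2.1)) = BF cs k m) := by
  intro m
  induction m with
  | zero => intro h _; omega
  | succ m ih =>
    intro hkm hmn
    by_cases hbase : (m : Int) < k - 1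
    · -- first window: m + 1 = k - 1; nothing recorded yet
      have he : ((m + 1 : Nat) : Int) = k - 1 := by push_cast; omega
      have hA := foldA_small cs k hk (m + 1) (by omega) hmn (by omega)
      have hB : BF cs k (m + 1) = [] := by
        unfold BF
        rw [PySem.List.pyRange_one_eq_nil (by omega)]
        rfl
      rw [hA, hB]
      refine ⟨rfl, by simp, ?_⟩
      intro h
      exact absurd h (by simp)
    · have hkm' : k - 1 ≤ (m : Int) := by omega
      have hm1 : 1 ≤ m := by omega
      obtain ⟨ih1, ih2, ih3⟩ := ih hkm' (by omega)
      -- the deque after step m is nonempty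
      have hmem := self_mem_DQ (LK cs) k (m : Int) hk (by omega)
      rcases hdq : DQ (LK cs) k (m : Int) with - | ⟨t0, rest⟩
      · rw [hdq] at hmem
        exact absurd hmem (List.not_mem_nil)
      -- characterize A's step
      have hstep := stepA_big k (pvSufSort cs) (LK cs) hk ((m : Int) - 1) (by omega)
        (AF cs k m).2.1 (AF cs k m).2.2 (by omega) t0 rest
        (by rw [show ((m : Int) - 1) + 1 = (m : Int) by ring]; exact hdq)
      rw [show ((m : Int) - 1) + 1 = (m : Int) by ring] at hstep
      have hAsucc : AF cs k (m + 1) =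
          (DQ (LK cs) k (m : Int),
            if (AF cs k m).2.1 < PySem.List.pyGetD (LK cs) t0 0 then
              (PySem.List.pyGetD (LK cs) t0 0, PySem.List.pyGetD (pvSufSort cs) (m : Int) 0)
            else ((AF cs k m).2.1, (AF cs k m).2.2)) := by
        rw [AF_succ cs k m hm1, ← ih1] at *
        rw [show (AF cs k m) = ((AF cs k m).1, (AF cs k m).2.1, (AF cs k m).2.2) from rfl] at hstep ⊢
        exact hstep
      -- the positions of this window's first and last suffix
      set p := ((m : Int) - k + 1).toNat with hp
      have hq : (m : Int).toNat = m := by omega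
      have hpm : ((p : Nat) : Int) = (m : Int) - k + 1 := by omega
      have hpltm : p < m := by omega
      have hmn' : m < cs.length := by omega
      -- B's step value
      have hbp := saN_bounds cs p (by omega)
      have hbq := saN_bounds cs m hmn'
      have hlval : PySem.List.pyGetD (LK cs) t0 0 =
          (lcpLen (sfx cs (saN cs p)) (sfx cs (saN cs m)) : Int) := by
        have := winmin_eq_block cs k (m : Int) hk (by omega) (by omega) t0 rest hdq
        rwa [hq] at this
      have hBsucc : BF cs k (m + 1) =
          if ((BF cs k m).length : Int) < (lcpLen (sfx cs (saN cs p)) (sfx cs (saN cs m)) : Int) then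
            PySem.List.slice cs (some (saN cs p))
              (some (saN cs p + (lcpLen (sfx cs (saN cs p)) (sfx cs (saN cs m)) : Int)))
          else BF cs k m := by
        rw [BF_succ cs k m hkm']
        unfold pvStepB
        simp only
        rw [show (m : Int) - k + 1 + k - 1 = (m : Int) by ring]
        rw [show ((m : Int) - k + 1) = ((p : Nat) : Int) from hpm.symm]
        rw [PySem.List.pyGetD_natCast, PySem.List.pyGetD_natCast]
        rw [show (pvSufSort cs).getD p 0 = saN cs p from rfl,
            show (pvSufSort cs).getD m 0 = saN cs m from rfl]
        have hcl : pvZipLen 0 (PySem.List.slice cs (some (saN cs p)) none)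
            (PySem.List.slice cs (some (saN cs m)) none) =
            (lcpLen (sfx cs (saN cs p)) (sfx cs (saN cs m)) : Int) := by
          rw [PySem.List.slice_from cs hbp.1, PySem.List.slice_from cs hbq.1,
              pvZipLen_add (cs.drop (saN cs p).toNat) (cs.drop (saN cs m).toNat) 0]
          unfold sfx
          ring
        rw [hcl]
      set l := lcpLen (sfx cs (saN cs p)) (sfx cs (saN cs m)) with hl
      have hlen_p : (sfx cs (saN cs p)).length = cs.length - (saN cs p).toNat := by
        unfold sfx
        rw [List.length_drop]
      have hle_l : l ≤ cs.length - (saN cs p).toNat := by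
        have := lcpLen_le_left (sfx cs (saN cs p)) (sfx cs (saN cs m))
        omega
      have hslice_len : (PySem.List.slice cs (some (saN cs p)) (some (saN cs p + (l : Int)))).length = l := by
        rw [PySem.List.slice_toNat cs hbp.1 (by omega)]
        rw [List.length_take, List.length_drop]
        omega
      rw [hAsucc, hBsucc, hlval, ← ih2]
      by_cases hcond : (AF cs k m).2.1 < (l : Int)
      · rw [if_pos hcond, if_pos hcond]
        refine ⟨by rw [show ((m + 1 : Nat) : Int) - 1 = (m : Int) by push_cast; ring], ?_, ?_⟩
        · simp only
          rw [hslice_len]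
        · intro _
          simp only
          -- both slices are the first l characters of equal prefixes
          have hq0 : PySem.List.pyGetD (pvSufSort cs) (m : Int) 0 = saN cs m := by
            rw [show ((m : Nat) : Int) = ((m : Nat) : Int) from rfl, PySem.List.pyGetD_natCast]
            rfl
          rw [hq0]
          rw [PySem.List.slice_toNat cs hbq.1 (by omega),
              PySem.List.slice_toNat cs hbp.1 (by omega)]
          have e1 : ((saN cs m + (l : Int)).toNat - (saN cs m).toNat) = l := by omega
          have e2 : ((saN cs p + (l : Int)).toNat - (saN cs p).toNat) = l := by omega
          rw [e1, e2]
          have htk := take_lcpLen (sfx cs (saN cs p)) (sfx cs (saN cs m))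
          rw [← hl] at htk
          exact htk.symm
      · rw [if_neg hcond, if_neg hcond]
        refine ⟨by rw [show ((m + 1 : Nat) : Int) - 1 = (m : Int) by push_cast; ring], ih2, ih3⟩

theorem pv_main (s : String) (k : Int) : longest_repeated_k_times s k = longest_repeated_k_times_alt s k := by
  unfold longest_repeated_k_times longest_repeated_k_times_alt
  by_cases h1 : s.toList = [] ∨ k ≤ 0
  · rw [if_pos h1, if_pos h1]
  · rw [if_neg h1, if_neg h1]
    by_cases h2 : k = 1
    · rw [if_pos h2, if_pos h2]
    · rw [if_neg h2, if_neg h2]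
      push_neg at h1
      have hcs : s.toList ≠ [] := h1.1
      have hk : 2 ≤ k := by
        have := h1.2
        omega
      show (if 0 < ((PySem.List.pyRange 1 ((s.toList.length : Nat) : Int) 1).foldl
              (pvStepA k (pvSuffixArray s.toList) (pvKasai s.toList (pvSuffixArray s.toList)))
              ([], 0, 0)).2.1
            then String.ofList (PySem.List.slice s.toList
              (some (((PySem.List.pyRange 1 ((s.toList.length : Nat) : Int) 1).foldl
                (pvStepA k (pvSuffixArray s.toList) (pvKasai s.toList (pvSuffixArray s.toList)))
                ([], 0, 0)).2.2))
              (some (((PySem.List.pyRange 1 ((s.toList.length : Nat) : Int) 1).foldl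
                (pvStepA k (pvSuffixArray s.toList) (pvKasai s.toList (pvSuffixArray s.toList)))
                ([], 0, 0)).2.2 +
                ((PySem.List.pyRange 1 ((s.toList.length : Nat) : Int) 1).foldl
                (pvStepA k (pvSuffixArray s.toList) (pvKasai s.toList (pvSuffixArray s.toList)))
                ([], 0, 0)).2.1)))
            else "")
          = String.ofList ((PySem.List.pyRange 0 (((s.toList.length : Nat) : Int) - k + 1) 1).foldl
              (pvStepB s.toList k (pvSufSort s.toList)) [])
      rw [pvSuffixArray_eq]
      rw [show pvKasai s.toList (pvSufSort s.toList) = LK s.toList from rfl]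
      rw [show (PySem.List.pyRange 1 ((s.toList.length : Nat) : Int) 1).foldl
            (pvStepA k (pvSufSort s.toList) (LK s.toList)) ([], 0, 0) =
          AF s.toList k s.toList.length from rfl]
      rw [show (PySem.List.pyRange 0 (((s.toList.length : Nat) : Int) - k + 1) 1).foldl
            (pvStepB s.toList k (pvSufSort s.toList)) [] =
          BF s.toList k s.toList.length from rfl]
      set cs := s.toList with hcsdef
      by_cases hkn : k ≤ (cs.length : Int)
      · obtain ⟨-, h2', h3'⟩ := foldAB cs k hk cs.length (by omega) le_rfl
        by_cases hpos : 0 < (AF cs k cs.length).2.1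
        · rw [if_pos hpos, h3' hpos]
        · rw [if_neg hpos]
          have hlen0 : (BF cs k cs.length).length = 0 := by omega
          rw [List.length_eq_zero_iff.1 hlen0]
      · have hn1 : 1 ≤ cs.length := by
          have : cs.length ≠ 0 := fun h => hcs (List.length_eq_zero_iff.1 h)
          omega
        rw [foldA_small cs k hk cs.length hn1 le_rfl (by omega)]
        rw [if_neg (by norm_num)]
        have hBnil : BF cs k cs.length = [] := by
          unfold BF
          rw [PySem.List.pyRange_one_eq_nil (by omega)]
          rfl
        rw [hBnil]

-- ===== VERDICT (by name: the statement is the Claim_ definition above) =====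
theorem longest_repeated_k_times_spec : Claim_equal_longest_repeated_k_times := by
  intro s k _
  exact pv_main s k
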